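-- pv_equiv track=rewrite | github.com/somm12/codingTest | 49주차/등산코스정하기.py | solution
-- ===== SOURCE A (Python) =====
-- import heapq
--
-- def solution(n, paths, gates, summits):
--     answer = []
--     summ = set()
--     for v in summits:
--         summ.add(v)
--     g= [[] for _ in range(n+1)]
--     for a,b,c in paths:
--         g[a].append((b,c))
--         g[b].append((a,c))
--
--     INF = int(1e9)
--     intens = [INF]*(n+1)
--     def da():
--         q = []
--         # 모든 지점에서의 최소의 Intensity를 구하면 되므로, 모든 시작점 부터 heap에 넣기.
--         for gate in gates:
--             heapq.heappush(q,(0,gate))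
--             intens[gate] = 0
--
--         while q:
--             intensity,now = heapq.heappop(q)
--             # 봉우리 도착 하거나 현재 노드까지의 intensity가 이미 작은 값이면 그만.
--             if now in summ or intens[now] < intensity:
--                 continue
--
--             for next,weight in g[now]:
--                 newInten = max(intensity, weight)# 다음 경로에서의 최대 intensity.
--                 if newInten < intens[next]:# 더작은 값이라면 그 값으로 업데이트.
--                     intens[next] = newInten
--                     heapq.heappush(q,(newInten,next))
--         return intens
--
--     da()
--     for v in summits:
--         answer.append((v,intens[v]))
--
--     answer.sort(key=lambda x: (x[1],x[0]))
--
--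
--     return [answer[0][0],answer[0][1]]
-- ===== SOURCE B (Python) =====
-- def solution(n, paths, gates, summits):
--     INF = int(1e9)
--     summ = set(summits)
--     edges = []
--     for a, b, c in paths:
--         edges.append((a, b, c))
--         edges.append((b, a, c))
--     intens = [INF] * (n + 1)
--     for gate in gates:
--         intens[gate] = 0
--     changed = True
--     while changed:
--         changed = False
--         for u, v, w in edges:
--             if u not in summ:
--                 cand = max(intens[u], w)
--                 if cand < intens[v]:
--                     intens[v] = cand
--                     changed = True
--     best = summits[0]
--     for v in summits:
--         if (intens[v], v) < (intens[best], best):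
--             best = v
--     return [best, intens[best]]
-- ===== Notes on version B (the rewrite author's own statement) =====
-- stated objective: alternative
-- what changed: Replaces the lazy-deletion heap Dijkstra over an adjacency list by Bellman-Ford-style rounds of edge relaxation over a flat edge list, iterated to the fixpoint, and replaces the sort-then-take-first selection by a single min-scan over the summits.
-- outside the precondition, e.g. on solution(1, [[0, -1, 7], [0, 1, 1], [-1, 0, 0]], [-2], [-1, 0, 0]): A returns [-1, 0], B returns [0, 0]
import Mathlib
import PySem

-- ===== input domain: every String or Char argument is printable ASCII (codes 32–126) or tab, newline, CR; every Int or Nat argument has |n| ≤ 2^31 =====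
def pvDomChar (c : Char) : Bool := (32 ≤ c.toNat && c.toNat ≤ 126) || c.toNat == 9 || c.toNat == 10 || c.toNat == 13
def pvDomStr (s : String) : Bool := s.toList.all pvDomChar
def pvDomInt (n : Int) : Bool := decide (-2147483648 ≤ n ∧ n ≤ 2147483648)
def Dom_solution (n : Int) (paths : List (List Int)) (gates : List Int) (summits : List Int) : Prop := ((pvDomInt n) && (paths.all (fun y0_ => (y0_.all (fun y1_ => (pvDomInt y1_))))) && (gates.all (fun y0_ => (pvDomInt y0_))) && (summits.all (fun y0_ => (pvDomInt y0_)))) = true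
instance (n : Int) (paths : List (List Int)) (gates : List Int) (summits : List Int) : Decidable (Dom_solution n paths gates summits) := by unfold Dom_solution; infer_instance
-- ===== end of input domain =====

-- B replaces A's lazy-deletion heap Dijkstra (adjacency list + sort-then-take-first selection) by
-- Bellman-Ford-style rounds of edge relaxation iterated to the fixpoint plus a single min-scan; return values agree on Pre_.

-- ===== PORT A =====
-- heapq on (intensity, node) pairs, modelled as a list kept sorted by Python's tuple order
-- (pop = head = minimum; duplicate tuples are identical values, so insertion position among equals is irrelevant)
def pvPairLe (x y : Int × Int) : Bool := decide (x.1 < y.1) || (decide (x.1 = y.1) && decide (x.2 ≤ y.2))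

def pvHeapPush (q : List (Int × Int)) (e : Int × Int) : List (Int × Int) :=
  match q with
  | [] => [e]
  | y :: ys => if pvPairLe e y then e :: y :: ys else y :: pvHeapPush ys e

-- 'for a,b,c in paths: g[a].append((b,c)); g[b].append((a,c))'
def pvAddEdges (g : List (List (Int × Int))) (row : List Int) : List (List (Int × Int)) :=
  let a := PySem.List.pyGetD row 0 0
  let b := PySem.List.pyGetD row 1 0
  let c := PySem.List.pyGetD row 2 0
  let g1 := PySem.List.pySetD g a (PySem.List.pyGetD g a [] ++ [(b, c)])
  PySem.List.pySetD g1 b (PySem.List.pyGetD g1 b [] ++ [(a, c)])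

-- body of the 'for next,weight in g[now]' loop (intensity = e.1 of the popped entry)
def pvDStep (i : Int) (st : List (Int × Int) × List Int) (nw : Int × Int) : List (Int × Int) × List Int :=
  let newInten := max i nw.2
  if newInten < PySem.List.pyGetD st.2 nw.1 0 then
    (pvHeapPush st.1 (newInten, nw.1), PySem.List.pySetD st.2 nw.1 newInten)
  else st

-- the 'while q:' loop of da(); fuel is an upper bound on the number of iterations, proved sufficient below
def pvDijLoop (summ : PySem.Set Int) (g : List (List (Int × Int))) :
    Nat → List (Int × Int) → List Int → List Int
  | 0, _, intens => intens
  | _ + 1, [], intens => intens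
  | fuel + 1, e :: rest, intens =>
    if PySem.Set.contains summ e.2 || decide (PySem.List.pyGetD intens e.2 0 < e.1) then
      pvDijLoop summ g fuel rest intens
    else
      let st := (PySem.List.pyGetD g e.2 []).foldl (pvDStep e.1) (rest, intens)
      pvDijLoop summ g fuel st.1 st.2

def solution (n : Int) (paths : List (List Int)) (gates : List Int) (summits : List Int) : List Int :=
  let summ : PySem.Set Int := summits.foldl (fun s v => PySem.Set.add s v) PySem.Set.empty
  let g := paths.foldl pvAddEdges (List.replicate (n + 1).toNat ([] : List (Int × Int)))
  let INF : Int := 1000000000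
  let intens0 := List.replicate (n + 1).toNat INF
  let qi := gates.foldl (fun (st : List (Int × Int) × List Int) gate =>
      (pvHeapPush st.1 (0, gate), PySem.List.pySetD st.2 gate 0)) ([], intens0)
  let intens := pvDijLoop summ g (2 * (n + 1).toNat * (paths.length + 2) + gates.length + 1) qi.1 qi.2
  let answer := summits.foldl (fun acc v => acc ++ [(v, PySem.List.pyGetD intens v 0)]) []
  let answer := PySem.List.sorted2 answer (fun x => x.2) (fun x => x.1) false
  [(PySem.List.pyGetD answer 0 (0, 0)).1, (PySem.List.pyGetD answer 0 (0, 0)).2]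

-- ===== PORT B =====
-- one edge relaxation: 'if u not in summ: cand = max(intens[u], w); if cand < intens[v]: intens[v] = cand; changed = True'
def pvRelaxEdge (summ : PySem.Set Int) (st : List Int × Bool) (e : Int × Int × Int) : List Int × Bool :=
  if PySem.Set.contains summ e.1 then st
  else
    let cand := max (PySem.List.pyGetD st.1 e.1 0) e.2.2
    if cand < PySem.List.pyGetD st.1 e.2.1 0 then (PySem.List.pySetD st.1 e.2.1 cand, true)
    else st

-- 'while changed:' — rounds of relaxation until a round changes nothing; fuel proved sufficient below
def pvBF (summ : PySem.Set Int) (edges : List (Int × Int × Int)) :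
    Nat → List Int → List Int
  | 0, t => t
  | fuel + 1, t =>
    let st := edges.foldl (pvRelaxEdge summ) (t, false)
    if st.2 then pvBF summ edges fuel st.1 else st.1

def solution_alt (n : Int) (paths : List (List Int)) (gates : List Int) (summits : List Int) : List Int :=
  let INF : Int := 1000000000
  let summ : PySem.Set Int := PySem.Set.ofList summits
  let edges := paths.foldl (fun es row =>
      let a := PySem.List.pyGetD row 0 0
      let b := PySem.List.pyGetD row 1 0
      let c := PySem.List.pyGetD row 2 0
      es ++ [(a, b, c)] ++ [(b, a, c)]) []
  let t0 := List.replicate (n + 1).toNat INF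
  let t1 := gates.foldl (fun t gate => PySem.List.pySetD t gate 0) t0
  let t := pvBF summ edges ((n + 1).toNat * (paths.length + 2) + 1) t1
  let best := summits.foldl (fun best v =>
      if PySem.List.pyGetD t v 0 < PySem.List.pyGetD t best 0 ∨
         (PySem.List.pyGetD t v 0 = PySem.List.pyGetD t best 0 ∧ v < best) then v else best)
    (PySem.List.pyGetD summits 0 0)
  [best, PySem.List.pyGetD t best 0]

-- ===== PRECONDITION & SPEC =====
-- the node ids the programs read: path endpoints, gates, summits
def pvLabels (paths : List (List Int)) (gates summits : List Int) : List Int :=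
  paths.flatMap (fun row => [PySem.List.pyGetD row 0 0, PySem.List.pyGetD row 1 0]) ++ gates ++ summits

-- Pre_ = the inputs on which A returns (rows of length 3, some summit, every id an in-range Python index
-- for the (n+1)-sized arrays, i.e. -(n+1) ≤ id ≤ n), minus those where two ids that denote the same array
-- cell through negative-index wraparound (same residue mod n+1) disagree on being a summit — an accident
-- of A's list indexing on which the two algorithms may legitimately differ.
def Pre_solution (n : Int) (paths : List (List Int)) (gates : List Int) (summits : List Int) : Prop :=
  0 ≤ n ∧ (∀ row ∈ paths, row.length = 3) ∧ summits ≠ [] ∧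
  (∀ v ∈ pvLabels paths gates summits, -(n + 1) ≤ v ∧ v ≤ n) ∧
  (∀ x ∈ pvLabels paths gates summits, ∀ y ∈ pvLabels paths gates summits,
    x % (n + 1) = y % (n + 1) → (x ∈ summits ↔ y ∈ summits))
instance (n : Int) (paths : List (List Int)) (gates : List Int) (summits : List Int) : Decidable (Pre_solution n paths gates summits) := by unfold Pre_solution; infer_instance

def pvWitness_solution : Int × List (List Int) × List Int × List Int := (3, [[1, 2, 3], [2, 3, 5]], [1], [3])

def Spec_solution (n : Int) (paths : List (List Int)) (gates : List Int) (summits : List Int) (out : List Int) : Prop := out = solution_alt n paths gates summits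
instance (n : Int) (paths : List (List Int)) (gates : List Int) (summits : List Int) (out : List Int) : Decidable (Spec_solution n paths gates summits out) := by unfold Spec_solution; infer_instance

-- ===== CLAIM (what is proved, stated in full; the proofs are below) =====
def Claim_equal_solution : Prop := ∀ (n : Int) (paths : List (List Int)) (gates : List Int) (summits : List Int), Dom_solution n paths gates summits → Pre_solution n paths gates summits → Spec_solution n paths gates summits (solution n paths gates summits)

-- ===== LEMMAS AND PROOFS =====

-- ---- proof-side vocabulary ----
def pvGood (n v : Int) : Prop := -(n + 1) ≤ v ∧ v ≤ n
def pvVal (t : List Int) (v : Int) : Int := PySem.List.pyGetD t v 0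
-- the array cell a (possibly negative) Python index denotes
def pvSlot (N : Nat) (v : Int) : Nat := (v % (N : Int)).toNat
-- the directed relaxation edges both programs read off `paths`
def pvEdges (paths : List (List Int)) : List (Int × Int × Int) :=
  paths.flatMap (fun row =>
    [(PySem.List.pyGetD row 0 0, PySem.List.pyGetD row 1 0, PySem.List.pyGetD row 2 0),
     (PySem.List.pyGetD row 1 0, PySem.List.pyGetD row 0 0, PySem.List.pyGetD row 2 0)])
-- out-edges of one array CELL (ids sharing the cell share the adjacency list), in A's adjacency order
def pvOut (n : Int) (paths : List (List Int)) (v : Int) : List (Int × Int) :=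
  paths.flatMap (fun row =>
    (if pvSlot (n + 1).toNat (PySem.List.pyGetD row 0 0) = pvSlot (n + 1).toNat v then
      [(PySem.List.pyGetD row 1 0, PySem.List.pyGetD row 2 0)] else []) ++
    (if pvSlot (n + 1).toNat (PySem.List.pyGetD row 1 0) = pvSlot (n + 1).toNat v then
      [(PySem.List.pyGetD row 0 0, PySem.List.pyGetD row 2 0)] else []))
-- every value either program ever stores
def pvS (paths : List (List Int)) : List Int :=
  1000000000 :: 0 :: paths.map (fun row => PySem.List.pyGetD row 2 0)
def pvRank (S : List Int) (x : Int) : Nat := S.countP (fun s => decide (s < x))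
def pvPhi (S t : List Int) : Nat := (t.map (pvRank S)).sum
def pvInS (S t : List Int) : Prop := ∀ x ∈ t, x ∈ S
def pvGe (lab t h : List Int) : Prop := ∀ v ∈ lab, pvVal h v ≤ pvVal t v
def pvGoodE (lab : List Int) (S : List Int) (e : Int × Int × Int) : Prop :=
  e.1 ∈ lab ∧ e.2.1 ∈ lab ∧ e.2.2 ∈ S
def pvRelaxedAt (paths : List (List Int)) (t : List Int) (v : Int) : Prop :=
  ∀ u w, (v, u, w) ∈ pvEdges paths → pvVal t u ≤ max (pvVal t v) w
-- the standing hypotheses about the id list: in range, and ids sharing a cell agree on being a summit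
def pvLabOK (n : Int) (lab summits : List Int) : Prop :=
  (∀ v ∈ lab, pvGood n v) ∧
  (∀ x ∈ lab, ∀ y ∈ lab, pvSlot (n + 1).toNat x = pvSlot (n + 1).toNat y →
    (x ∈ summits ↔ y ∈ summits))

-- ---- basic index/value lemmas ----
lemma pv_slot_pos (N : Nat) (v : Int) (h0 : 0 ≤ v) (h2 : v < (N : Int)) :
    pvSlot N v = v.toNat := by
  unfold pvSlot; rw [Int.emod_eq_of_lt h0 h2]

lemma pv_slot_neg (N : Nat) (v : Int) (h1 : -(N : Int) ≤ v) (h0 : v < 0) :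
    pvSlot N v = N - (-v).toNat := by
  unfold pvSlot
  have h3 : v % (N : Int) = v + N := by
    have h := Int.add_emod_right v (N : Int)
    rw [← h, Int.emod_eq_of_lt (by omega) (by omega)]
  rw [h3]; omega

lemma pv_slot_lt (N : Nat) (v : Int) (h1 : -(N : Int) ≤ v) (h2 : v < (N : Int)) (hN : 0 < N) :
    pvSlot N v < N := by
  unfold pvSlot
  have ha := Int.emod_nonneg v (by omega : (N : Int) ≠ 0)
  have hb := Int.emod_lt_of_pos v (by omega : (0:Int) < (N : Int))
  omega

lemma pv_idx_eq (N : Nat) (v : Int) (h1 : -(N : Int) ≤ v) (h2 : v < (N : Int)) :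
    PySem.List.pyIdx? N v = some (pvSlot N v) := by
  unfold PySem.List.pyIdx?
  by_cases h0 : 0 ≤ v
  · rw [if_pos h0, if_pos h2, pv_slot_pos N v h0 h2]
  · rw [if_neg h0, if_pos h1, pv_slot_neg N v h1 (by omega)]

lemma pv_getD_wrap {α : Type} (t : List α) (v : Int) (d : α)
    (h1 : -(t.length : Int) ≤ v) (h2 : v < (t.length : Int)) :
    PySem.List.pyGetD t v d = t.getD (pvSlot t.length v) d := by
  unfold PySem.List.pyGetD PySem.List.pyGet?
  rw [pv_idx_eq t.length v h1 h2]
  simp [List.getD]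

lemma pv_getD_oor {α : Type} (t : List α) (v : Int) (d : α)
    (h : v < -(t.length : Int) ∨ (t.length : Int) ≤ v) :
    PySem.List.pyGetD t v d = d := by
  unfold PySem.List.pyGetD PySem.List.pyGet? PySem.List.pyIdx?
  rcases h with h | h
  · rw [if_neg (by omega), if_neg (by omega)]; rfl
  · rw [if_pos (by omega), if_neg (by omega)]; rfl

lemma pv_setD_wrap {α : Type} (t : List α) (v : Int) (x : α)
    (h1 : -(t.length : Int) ≤ v) (h2 : v < (t.length : Int)) :
    PySem.List.pySetD t v x = t.set (pvSlot t.length v) x := by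
  unfold PySem.List.pySetD PySem.List.pySet?
  rw [pv_idx_eq t.length v h1 h2]
  rfl

lemma pv_len_setD {α : Type} (t : List α) (v : Int) (x : α) :
    (PySem.List.pySetD t v x).length = t.length := by
  simp [pysem]

lemma pv_getD_setD_cases {α : Type} (t : List α) (v u : Int) (x d : α)
    (hv1 : -(t.length : Int) ≤ v) (hv2 : v < (t.length : Int)) :
    PySem.List.pyGetD (PySem.List.pySetD t v x) u d =
      if -(t.length : Int) ≤ u ∧ u < (t.length : Int) ∧ pvSlot t.length u = pvSlot t.length v
      then x else PySem.List.pyGetD t u d := by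
  have hN : 0 < t.length := by omega
  rw [pv_setD_wrap t v x hv1 hv2]
  by_cases hu : -(t.length : Int) ≤ u ∧ u < (t.length : Int)
  · rw [pv_getD_wrap _ u d (by simpa using hu.1) (by simpa using hu.2),
      pv_getD_wrap t u d hu.1 hu.2]
    simp only [List.length_set]
    by_cases hs : pvSlot t.length u = pvSlot t.length v
    · rw [if_pos ⟨hu.1, hu.2, hs⟩, hs]
      simp [List.getD, List.getElem?_set_self, pv_slot_lt t.length v hv1 hv2 hN]
    · rw [if_neg (by tauto)]
      simp [List.getD, List.getElem?_set_ne (fun h => hs (h.symm))]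
  · rw [if_neg (by tauto)]
    have hu' : u < -(t.length : Int) ∨ (t.length : Int) ≤ u := by omega
    rw [pv_getD_oor _ u d (by simpa using hu'), pv_getD_oor t u d hu']

lemma pv_val_set_mono (t : List Int) (v x : Int)
    (hv1 : -(t.length : Int) ≤ v) (hv2 : v < (t.length : Int))
    (hx : x ≤ pvVal t v) :
    ∀ u, pvVal (PySem.List.pySetD t v x) u ≤ pvVal t u := by
  intro u
  unfold pvVal at *
  rw [pv_getD_setD_cases t v u x 0 hv1 hv2]
  split
  · rename_i hcond
    calc x ≤ PySem.List.pyGetD t v 0 := hx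
      _ = t.getD (pvSlot t.length v) 0 := pv_getD_wrap t v 0 hv1 hv2
      _ = t.getD (pvSlot t.length u) 0 := by rw [hcond.2.2]
      _ = PySem.List.pyGetD t u 0 := (pv_getD_wrap t u 0 hcond.1 hcond.2.1).symm
  · exact le_refl _

lemma pv_getD_replicate {α : Type} (N : Nat) (c d : α) (v : Int)
    (h1 : -(N : Int) ≤ v) (h2 : v < (N : Int)) :
    PySem.List.pyGetD (List.replicate N c) v d = c := by
  rw [pv_getD_wrap _ v d (by simpa using h1) (by simpa using h2)]
  have := pv_slot_lt N v h1 h2 (by omega)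
  simp only [List.length_replicate]
  simp [List.getD, List.getElem?_replicate, this]

lemma pv_val_mem_or_default (S t : List Int) (v : Int) (hS : pvInS S t) (h0 : (0:Int) ∈ S) :
    pvVal t v ∈ S := by
  unfold pvVal
  cases h : PySem.List.pyGet? t v with
  | none => rw [PySem.List.pyGetD_of_none _ _ _ h]; exact h0
  | some x =>
    have hx : x ∈ t := PySem.List.mem_of_pyGet?_eq_some t h
    have : PySem.List.pyGetD t v 0 = x := by simp [PySem.List.pyGetD, h]
    rw [this]; exact hS x hx

lemma pv_inS_set (S t : List Int) (v x : Int)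
    (hv1 : -(t.length : Int) ≤ v) (hv2 : v < (t.length : Int))
    (hS : pvInS S t) (hx : x ∈ S) :
    pvInS S (PySem.List.pySetD t v x) := by
  rw [pv_setD_wrap t v x hv1 hv2]
  intro y hy
  rcases List.mem_or_eq_of_mem_set hy with h | rfl
  · exact hS y h
  · exact hx

-- reads through two ids of the same cell agree
lemma pv_getD_slot_eq {α : Type} (n : Int) (hn : 0 ≤ n) (T : List α)
    (hT : T.length = (n + 1).toNat) (u v : Int) (d : α)
    (hu : pvGood n u) (hv : pvGood n v)
    (hs : pvSlot (n + 1).toNat u = pvSlot (n + 1).toNat v) :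
    PySem.List.pyGetD T u d = PySem.List.pyGetD T v d := by
  obtain ⟨hu1, hu2⟩ := hu
  obtain ⟨hv1, hv2⟩ := hv
  rw [pv_getD_wrap T u d (by omega) (by omega), pv_getD_wrap T v d (by omega) (by omega), hT, hs]

-- set/get through ids, decided by the cells they denote
lemma pv_getD_setD_cases' {α : Type} (n : Int) (hn : 0 ≤ n) (T : List α)
    (hT : T.length = (n + 1).toNat) (x u : Int) (val d : α)
    (hx : pvGood n x) (hu : pvGood n u) :
    PySem.List.pyGetD (PySem.List.pySetD T x val) u d =
      if pvSlot (n + 1).toNat u = pvSlot (n + 1).toNat x then val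
      else PySem.List.pyGetD T u d := by
  obtain ⟨hx1, hx2⟩ := hx
  obtain ⟨hu1, hu2⟩ := hu
  rw [pv_getD_setD_cases T x u val d (by omega) (by omega)]
  rw [hT]
  by_cases hs : pvSlot (n + 1).toNat u = pvSlot (n + 1).toNat x
  · rw [if_pos ⟨by omega, by omega, hs⟩, if_pos hs]
  · rw [if_neg (by tauto), if_neg hs]

-- ---- rank / potential ----
lemma pv_rank_lt (S : List Int) (x y : Int) (hx : x ∈ S) (hxy : x < y) :
    pvRank S x < pvRank S y := by
  unfold pvRank
  obtain ⟨s1, s2, rfl⟩ := List.append_of_mem hx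
  have h1 : List.countP (fun s => decide (s < x)) s1 ≤ List.countP (fun s => decide (s < y)) s1 := by
    apply List.countP_mono_left; intro a _ h; simp only [decide_eq_true_eq] at h ⊢; omega
  have h2 : List.countP (fun s => decide (s < x)) s2 ≤ List.countP (fun s => decide (s < y)) s2 := by
    apply List.countP_mono_left; intro a _ h; simp only [decide_eq_true_eq] at h ⊢; omega
  have hxx : (decide (x < x) : Bool) = false := by simp
  have hxy' : (decide (x < y) : Bool) = true := by simpa using hxy
  simp [hxx, hxy', List.countP_append, List.countP_cons]
  omega

lemma pv_rank_le_len (S : List Int) (x : Int) : pvRank S x ≤ S.length :=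
  List.countP_le_length

lemma pv_phi_le (S t : List Int) : pvPhi S t ≤ t.length * S.length := by
  unfold pvPhi
  calc (t.map (pvRank S)).sum ≤ (t.map (pvRank S)).length * S.length := by
        apply List.sum_le_card_nsmul
        intro x hx
        obtain ⟨y, _, rfl⟩ := List.mem_map.mp hx
        exact pv_rank_le_len S y
    _ = t.length * S.length := by simp

lemma pv_phi_set_lt_nat (S : List Int) : ∀ (t : List Int) (i : Nat) (x : Int),
    i < t.length → pvRank S x < pvRank S (t.getD i 0) →
    ((t.set i x).map (pvRank S)).sum < (t.map (pvRank S)).sum := by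
  intro t
  induction t with
  | nil => intro i x h; simp at h
  | cons a t ih =>
    intro i x h hr
    cases i with
    | zero =>
      rw [List.set_cons_zero]
      simp only [List.map_cons, List.sum_cons]
      have ha : (a :: t).getD 0 0 = a := by simp
      rw [ha] at hr
      omega
    | succ j =>
      rw [List.set_cons_succ]
      simp only [List.map_cons, List.sum_cons]
      have hj : j < t.length := by simpa using h
      have hd : (a :: t).getD (j + 1) 0 = t.getD j 0 := by simp [List.getD]
      rw [hd] at hr
      have := ih j x hj hr
      omega

lemma pv_phi_set_lt (S t : List Int) (v x : Int)
    (h1 : -(t.length : Int) ≤ v) (h2 : v < (t.length : Int))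
    (hr : pvRank S x < pvRank S (pvVal t v)) :
    pvPhi S (PySem.List.pySetD t v x) < pvPhi S t := by
  unfold pvPhi
  rw [pv_setD_wrap t v x h1 h2]
  apply pv_phi_set_lt_nat S t (pvSlot t.length v) x (pv_slot_lt t.length v h1 h2 (by omega))
  unfold pvVal at hr
  rwa [pv_getD_wrap t v 0 h1 h2] at hr

-- ---- heap lemmas ----
lemma pv_mem_heapPush (q : List (Int × Int)) (e x : Int × Int) :
    x ∈ pvHeapPush q e ↔ x = e ∨ x ∈ q := by
  induction q with
  | nil => simp [pvHeapPush]
  | cons y ys ih =>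
    unfold pvHeapPush
    split
    · simp [or_comm, or_assoc, or_left_comm]
    · simp [ih]; tauto

lemma pv_len_heapPush (q : List (Int × Int)) (e : Int × Int) :
    (pvHeapPush q e).length = q.length + 1 := by
  induction q with
  | nil => simp [pvHeapPush]
  | cons y ys ih => unfold pvHeapPush; split <;> simp [ih]

-- ---- summit set ----
lemma pv_contains_summ (summits : List Int) (x : Int) :
    PySem.Set.contains (PySem.Set.ofList summits) x = true ↔ x ∈ summits := by
  unfold PySem.Set.contains
  rw [List.contains_iff_mem, PySem.Set.mem_ofList]

lemma pv_summA (summits : List Int) :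
    summits.foldl (fun s v => PySem.Set.add s v) PySem.Set.empty = PySem.Set.ofList summits := by
  rw [PySem.Set.ofList_eq_foldl]
  rfl

-- ---- edge/adjacency characterisations ----
lemma pv_edgesB (paths : List (List Int)) : ∀ acc : List (Int × Int × Int),
    paths.foldl (fun es row =>
      let a := PySem.List.pyGetD row 0 0
      let b := PySem.List.pyGetD row 1 0
      let c := PySem.List.pyGetD row 2 0
      es ++ [(a, b, c)] ++ [(b, a, c)]) acc = acc ++ pvEdges paths := by
  induction paths with
  | nil => intro acc; simp [pvEdges]
  | cons row rows ih =>
    intro acc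
    simp only [List.foldl_cons, ih, pvEdges, List.flatMap_cons]
    simp [List.append_assoc]

lemma pv_mem_pvOut (n : Int) (paths : List (List Int)) (v u w : Int) :
    (u, w) ∈ pvOut n paths v ↔
    ∃ src, pvSlot (n + 1).toNat src = pvSlot (n + 1).toNat v ∧ (src, u, w) ∈ pvEdges paths := by
  simp only [pvOut, pvEdges, List.mem_flatMap]
  constructor
  · rintro ⟨row, hrow, h⟩
    rcases List.mem_append.mp h with h | h
    · refine ⟨PySem.List.pyGetD row 0 0, ?_, row, hrow, ?_⟩ <;> split at h <;> simp_all
    · refine ⟨PySem.List.pyGetD row 1 0, ?_, row, hrow, ?_⟩ <;> split at h <;> simp_all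
  · rintro ⟨src, hs, row, hrow, h⟩
    refine ⟨row, hrow, ?_⟩
    simp only [List.mem_cons, List.mem_singleton] at h
    rcases h with h | h | h
    · apply List.mem_append.mpr
      left
      have h0 : src = PySem.List.pyGetD row 0 0 := congrArg (fun p => p.1) h
      have h1 : u = PySem.List.pyGetD row 1 0 := congrArg (fun p => p.2.1) h
      have h2 : w = PySem.List.pyGetD row 2 0 := congrArg (fun p => p.2.2) h
      rw [if_pos (by rw [← h0]; exact hs), h1, h2]
      simp
    · apply List.mem_append.mpr
      right
      have h0 : src = PySem.List.pyGetD row 1 0 := congrArg (fun p => p.1) h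
      have h1 : u = PySem.List.pyGetD row 0 0 := congrArg (fun p => p.2.1) h
      have h2 : w = PySem.List.pyGetD row 2 0 := congrArg (fun p => p.2.2) h
      rw [if_pos (by rw [← h0]; exact hs), h1, h2]
      simp
    · simp at h

lemma pv_adjA (n : Int) (paths : List (List Int)) (lab : List Int)
    (hgood : ∀ v ∈ lab, pvGood n v) (hn : 0 ≤ n)
    (hrow : ∀ row ∈ paths, PySem.List.pyGetD row 0 0 ∈ lab ∧ PySem.List.pyGetD row 1 0 ∈ lab) :
    ∀ (g0 : List (List (Int × Int))), g0.length = (n + 1).toNat →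
    (paths.foldl pvAddEdges g0).length = (n + 1).toNat ∧
    ∀ v, pvGood n v → PySem.List.pyGetD (paths.foldl pvAddEdges g0) v [] =
      PySem.List.pyGetD g0 v [] ++ pvOut n paths v := by
  induction paths with
  | nil => intro g0 hlen; exact ⟨hlen, by intro v _; simp [pvOut]⟩
  | cons row rows ih =>
    intro g0 hlen
    obtain ⟨haL, hbL⟩ := hrow row (by simp)
    have hag : pvGood n (PySem.List.pyGetD row 0 0) := hgood _ haL
    have hbg : pvGood n (PySem.List.pyGetD row 1 0) := hgood _ hbL
    have hrs : ∀ r ∈ rows, PySem.List.pyGetD r 0 0 ∈ lab ∧ PySem.List.pyGetD r 1 0 ∈ lab := by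
      intro r hrr; exact hrow r (by simp [hrr])
    have hg1len : (pvAddEdges g0 row).length = (n + 1).toNat := by
      unfold pvAddEdges
      rw [pv_len_setD, pv_len_setD, hlen]
    obtain ⟨hfl, hfv⟩ := ih hrs (pvAddEdges g0 row) hg1len
    refine ⟨hfl, ?_⟩
    intro v hvg
    rw [List.foldl_cons, hfv v hvg]
    have hout : pvOut n (row :: rows) v =
        ((if pvSlot (n + 1).toNat (PySem.List.pyGetD row 0 0) = pvSlot (n + 1).toNat v then
            [(PySem.List.pyGetD row 1 0, PySem.List.pyGetD row 2 0)] else []) ++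
         (if pvSlot (n + 1).toNat (PySem.List.pyGetD row 1 0) = pvSlot (n + 1).toNat v then
            [(PySem.List.pyGetD row 0 0, PySem.List.pyGetD row 2 0)] else [])) ++
        pvOut n rows v := by
      unfold pvOut
      rw [List.flatMap_cons]
    rw [hout, ← List.append_assoc]
    congr 1
    have hinner : (pvAddEdges g0 row) =
        PySem.List.pySetD (PySem.List.pySetD g0 (PySem.List.pyGetD row 0 0)
          (PySem.List.pyGetD g0 (PySem.List.pyGetD row 0 0) [] ++
            [(PySem.List.pyGetD row 1 0, PySem.List.pyGetD row 2 0)]))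
          (PySem.List.pyGetD row 1 0)
          (PySem.List.pyGetD (PySem.List.pySetD g0 (PySem.List.pyGetD row 0 0)
            (PySem.List.pyGetD g0 (PySem.List.pyGetD row 0 0) [] ++
              [(PySem.List.pyGetD row 1 0, PySem.List.pyGetD row 2 0)]))
            (PySem.List.pyGetD row 1 0) [] ++
            [(PySem.List.pyGetD row 0 0, PySem.List.pyGetD row 2 0)]) := rfl
    rw [hinner]
    have hg1l : (PySem.List.pySetD g0 (PySem.List.pyGetD row 0 0)
        (PySem.List.pyGetD g0 (PySem.List.pyGetD row 0 0) [] ++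
          [(PySem.List.pyGetD row 1 0, PySem.List.pyGetD row 2 0)])).length = (n + 1).toNat := by
      rw [pv_len_setD, hlen]
    rw [pv_getD_setD_cases' n hn _ hg1l _ _ _ _ hbg hvg,
      pv_getD_setD_cases' n hn _ hlen _ _ _ _ hag hbg,
      pv_getD_setD_cases' n hn _ hlen _ _ _ _ hag hvg]
    by_cases hsbv : pvSlot (n + 1).toNat v = pvSlot (n + 1).toNat (PySem.List.pyGetD row 1 0)
    · rw [if_pos hsbv, if_pos hsbv.symm]
      by_cases hsba : pvSlot (n + 1).toNat (PySem.List.pyGetD row 1 0) =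
          pvSlot (n + 1).toNat (PySem.List.pyGetD row 0 0)
      · rw [if_pos hsba, if_pos (hsba.symm.trans hsbv.symm)]
        rw [pv_getD_slot_eq n hn g0 hlen _ v [] hag hvg (hsba.symm.trans hsbv.symm).symm.symm]
        rw [List.append_assoc]
      · rw [if_neg hsba, if_neg (fun h => hsba ((h.trans hsbv).symm))]
        rw [pv_getD_slot_eq n hn g0 hlen _ v [] hbg hvg hsbv.symm]
        simp
    · have hBv : ¬ pvSlot (n + 1).toNat (PySem.List.pyGetD row 1 0) = pvSlot (n + 1).toNat v :=
        fun h => hsbv h.symm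
      rw [if_neg hsbv, if_neg hBv]
      by_cases hsav : pvSlot (n + 1).toNat v = pvSlot (n + 1).toNat (PySem.List.pyGetD row 0 0)
      · rw [if_pos hsav, if_pos hsav.symm]
        rw [pv_getD_slot_eq n hn g0 hlen _ v [] hag hvg hsav.symm]
        simp
      · have hAv : ¬ pvSlot (n + 1).toNat (PySem.List.pyGetD row 0 0) = pvSlot (n + 1).toNat v :=
          fun h => hsav h.symm
        rw [if_neg hsav, if_neg hAv]
        simp

lemma pv_goodE (paths : List (List Int)) (lab : List Int)
    (hrow : ∀ row ∈ paths, PySem.List.pyGetD row 0 0 ∈ lab ∧ PySem.List.pyGetD row 1 0 ∈ lab) :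
    ∀ e ∈ pvEdges paths, pvGoodE lab (pvS paths) e := by
  intro e he
  simp only [pvEdges, List.mem_flatMap] at he
  obtain ⟨row, hr, hm⟩ := he
  have := hrow row hr
  have hw : PySem.List.pyGetD row 2 0 ∈ pvS paths := by
    simp only [pvS, List.mem_cons]
    exact Or.inr (Or.inr (List.mem_map.mpr ⟨row, hr, rfl⟩))
  simp only [List.mem_cons, List.mem_singleton] at hm
  rcases hm with rfl | rfl | h
  · exact ⟨this.1, this.2, hw⟩
  · exact ⟨this.2, this.1, hw⟩
  · simp at h

-- a queue entry standing for (any alias of) the cell of v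
def pvEntryFor (n : Int) (lab t : List Int) (q : List (Int × Int)) (v : Int) : Prop :=
  ∃ x ∈ lab, pvSlot (n + 1).toNat x = pvSlot (n + 1).toNat v ∧ (pvVal t x, x) ∈ q

-- ---- B-side loop lemmas ----
lemma pv_relax_snd_true (summ : PySem.Set Int) (es : List (Int × Int × Int)) :
    ∀ st : List Int × Bool, st.2 = true → (es.foldl (pvRelaxEdge summ) st).2 = true := by
  induction es with
  | nil => intro st h; simpa using h
  | cons e es ih =>
    intro st h
    rw [List.foldl_cons]
    apply ih
    unfold pvRelaxEdge
    split
    · exact h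
    · dsimp only
      split
      · rfl
      · exact h

lemma pv_bf_fold_main (n : Int) (S : List Int) (summ : PySem.Set Int) (lab : List Int)
    (hgood : ∀ v ∈ lab, pvGood n v) (hn : 0 ≤ n) :
    ∀ (es : List (Int × Int × Int)) (t : List Int) (b : Bool),
    (∀ e ∈ es, pvGoodE lab S e) → t.length = (n + 1).toNat →
    pvInS S t → (0:Int) ∈ S →
    (es.foldl (pvRelaxEdge summ) (t, b)).1.length = (n + 1).toNat ∧
    pvInS S (es.foldl (pvRelaxEdge summ) (t, b)).1 ∧
    (∀ v, pvVal (es.foldl (pvRelaxEdge summ) (t, b)).1 v ≤ pvVal t v) ∧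
    pvPhi S (es.foldl (pvRelaxEdge summ) (t, b)).1 ≤ pvPhi S t ∧
    ((es.foldl (pvRelaxEdge summ) (t, b)).2 = true →
      b = true ∨ pvPhi S (es.foldl (pvRelaxEdge summ) (t, b)).1 < pvPhi S t) ∧
    (b = true → (es.foldl (pvRelaxEdge summ) (t, b)).2 = true) := by
  intro es
  induction es with
  | nil =>
    intro t b _ hlen hS _
    simp only [List.foldl_nil]
    exact ⟨hlen, hS, fun v => le_refl _, le_refl _, fun h => Or.inl h, fun h => h⟩
  | cons e es ih =>
    intro t b hes hlen hS h0
    have he := hes e (by simp)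
    have hes' : ∀ e' ∈ es, pvGoodE lab S e' := fun e' h' => hes e' (by simp [h'])
    rw [List.foldl_cons]
    by_cases hc : PySem.Set.contains summ e.1 = true
    · have hstep : pvRelaxEdge summ (t, b) e = (t, b) := by
        unfold pvRelaxEdge; rw [if_pos hc]
      rw [hstep]
      exact ih t b hes' hlen hS h0
    · by_cases hlt : max (PySem.List.pyGetD t e.1 0) e.2.2 < PySem.List.pyGetD t e.2.1 0
      · have hstep : pvRelaxEdge summ (t, b) e =
            (PySem.List.pySetD t e.2.1 (max (PySem.List.pyGetD t e.1 0) e.2.2), true) := by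
          unfold pvRelaxEdge; rw [if_neg hc]; dsimp only; rw [if_pos hlt]
        rw [hstep]
        obtain ⟨hg1, hg2, hg3⟩ := he
        obtain ⟨hx0, hx1⟩ := hgood _ hg2
        have hxr1 : -(t.length : Int) ≤ e.2.1 := by omega
        have hxr2 : e.2.1 < (t.length : Int) := by omega
        have hcandS : max (PySem.List.pyGetD t e.1 0) e.2.2 ∈ S := by
          rcases max_choice (PySem.List.pyGetD t e.1 0) e.2.2 with h | h <;> rw [h]
          · exact pv_val_mem_or_default S t e.1 hS h0
          · exact hg3
        have hlen1 : (PySem.List.pySetD t e.2.1 (max (PySem.List.pyGetD t e.1 0) e.2.2)).length = (n + 1).toNat := by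
          rw [pv_len_setD]; exact hlen
        have hS1 := pv_inS_set S t e.2.1 _ hxr1 hxr2 hS hcandS
        have hmono1 := pv_val_set_mono t e.2.1 (max (PySem.List.pyGetD t e.1 0) e.2.2)
          hxr1 hxr2 (le_of_lt hlt)
        have hphi1 : pvPhi S (PySem.List.pySetD t e.2.1 (max (PySem.List.pyGetD t e.1 0) e.2.2)) < pvPhi S t := by
          apply pv_phi_set_lt S t _ _ hxr1 hxr2
          exact pv_rank_lt S _ _ hcandS hlt
        obtain ⟨r1, r2, r3, r4, _, r6⟩ := ih _ true hes' hlen1 hS1 h0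
        refine ⟨r1, r2, ?_, ?_, ?_, fun _ => r6 rfl⟩
        · intro v; exact le_trans (r3 v) (hmono1 v)
        · omega
        · intro _; right; omega
      · have hstep : pvRelaxEdge summ (t, b) e = (t, b) := by
          unfold pvRelaxEdge; rw [if_neg hc]; dsimp only; rw [if_neg hlt]
        rw [hstep]
        exact ih t b hes' hlen hS h0

lemma pv_bf_fold_unchanged (summ : PySem.Set Int) : ∀ (es : List (Int × Int × Int)) (t t' : List Int),
    es.foldl (pvRelaxEdge summ) (t, false) = (t', false) →
    t' = t ∧ ∀ e ∈ es, PySem.Set.contains summ e.1 = false →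
      pvVal t e.2.1 ≤ max (pvVal t e.1) e.2.2 := by
  intro es
  induction es with
  | nil =>
    intro t t' h
    simp only [List.foldl_nil, Prod.mk.injEq] at h
    exact ⟨h.1.symm, by simp⟩
  | cons e es ih =>
    intro t t' h
    rw [List.foldl_cons] at h
    by_cases hc : PySem.Set.contains summ e.1 = true
    · rw [show pvRelaxEdge summ (t, false) e = (t, false) from by unfold pvRelaxEdge; rw [if_pos hc]] at h
      obtain ⟨h1, h2⟩ := ih t t' h
      refine ⟨h1, ?_⟩
      intro e' he' hce'
      rcases List.mem_cons.mp he' with rfl | he'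
      · rw [hce'] at hc; cases hc
      · exact h2 e' he' hce'
    · by_cases hlt : max (PySem.List.pyGetD t e.1 0) e.2.2 < PySem.List.pyGetD t e.2.1 0
      · rw [show pvRelaxEdge summ (t, false) e =
            (PySem.List.pySetD t e.2.1 (max (PySem.List.pyGetD t e.1 0) e.2.2), true) from by
            unfold pvRelaxEdge; rw [if_neg hc]; dsimp only; rw [if_pos hlt]] at h
        have := pv_relax_snd_true summ es _ (rfl :
          ((PySem.List.pySetD t e.2.1 (max (PySem.List.pyGetD t e.1 0) e.2.2), true) : List Int × Bool).2 = true)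
        rw [h] at this
        cases this
      · rw [show pvRelaxEdge summ (t, false) e = (t, false) from by
            unfold pvRelaxEdge; rw [if_neg hc]; dsimp only; rw [if_neg hlt]] at h
        obtain ⟨h1, h2⟩ := ih t t' h
        refine ⟨h1, ?_⟩
        intro e' he' hce'
        rcases List.mem_cons.mp he' with rfl | he'
        · exact (not_lt.mp hlt)
        · exact h2 e' he' hce'

lemma pv_bf_fold_ge (n : Int) (summ : PySem.Set Int) (H : List Int) (lab : List Int)
    (hgood : ∀ v ∈ lab, pvGood n v) (hn : 0 ≤ n) (hHlen : H.length = (n + 1).toNat) :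
    ∀ (es : List (Int × Int × Int)) (t : List Int) (b : Bool),
    (∀ e ∈ es, e.1 ∈ lab ∧ e.2.1 ∈ lab) →
    (∀ e ∈ es, PySem.Set.contains summ e.1 = false → pvVal H e.2.1 ≤ max (pvVal H e.1) e.2.2) →
    t.length = (n + 1).toNat → pvGe lab t H →
    (es.foldl (pvRelaxEdge summ) (t, b)).1.length = (n + 1).toNat ∧
    pvGe lab (es.foldl (pvRelaxEdge summ) (t, b)).1 H := by
  intro es
  induction es with
  | nil => intro t b _ _ hlen hge; exact ⟨hlen, hge⟩
  | cons e es ih =>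
    intro t b hes hH hlen hge
    have he := hes e (by simp)
    have hHe := hH e (by simp)
    have hes' : ∀ e' ∈ es, e'.1 ∈ lab ∧ e'.2.1 ∈ lab := fun e' h' => hes e' (by simp [h'])
    have hH' : ∀ e' ∈ es, PySem.Set.contains summ e'.1 = false →
        pvVal H e'.2.1 ≤ max (pvVal H e'.1) e'.2.2 := fun e' h' => hH e' (by simp [h'])
    rw [List.foldl_cons]
    by_cases hc : PySem.Set.contains summ e.1 = true
    · rw [show pvRelaxEdge summ (t, b) e = (t, b) from by unfold pvRelaxEdge; rw [if_pos hc]]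
      exact ih t b hes' hH' hlen hge
    · by_cases hlt : max (PySem.List.pyGetD t e.1 0) e.2.2 < PySem.List.pyGetD t e.2.1 0
      · rw [show pvRelaxEdge summ (t, b) e =
            (PySem.List.pySetD t e.2.1 (max (PySem.List.pyGetD t e.1 0) e.2.2), true) from by
            unfold pvRelaxEdge; rw [if_neg hc]; dsimp only; rw [if_pos hlt]]
        have hcf : PySem.Set.contains summ e.1 = false := by
          revert hc; cases PySem.Set.contains summ e.1 <;> simp
        apply ih _ true hes' hH' (by rw [pv_len_setD]; exact hlen)
        intro v hvL
        unfold pvVal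
        rw [pv_getD_setD_cases' n hn t hlen _ _ _ _ (hgood _ he.2) (hgood _ hvL)]
        split
        · rename_i hs
          calc PySem.List.pyGetD H v 0
              = PySem.List.pyGetD H e.2.1 0 :=
                pv_getD_slot_eq n hn H hHlen v e.2.1 0 (hgood _ hvL) (hgood _ he.2) hs
            _ ≤ max (pvVal H e.1) e.2.2 := hHe hcf
            _ ≤ max (pvVal t e.1) e.2.2 := max_le_max (hge e.1 he.1) (le_refl _)
        · exact hge v hvL
      · rw [show pvRelaxEdge summ (t, b) e = (t, b) from by
            unfold pvRelaxEdge; rw [if_neg hc]; dsimp only; rw [if_neg hlt]]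
        exact ih t b hes' hH' hlen hge

lemma pv_bf_main (n : Int) (S : List Int) (summ : PySem.Set Int) (lab : List Int)
    (hgood : ∀ v ∈ lab, pvGood n v) (hn : 0 ≤ n)
    (es : List (Int × Int × Int))
    (hes : ∀ e ∈ es, pvGoodE lab S e) (h0 : (0:Int) ∈ S) :
    ∀ (fuel : Nat) (t : List Int),
    t.length = (n + 1).toNat → pvInS S t → pvPhi S t < fuel →
    (pvBF summ es fuel t).length = (n + 1).toNat ∧
    (∀ v, pvVal (pvBF summ es fuel t) v ≤ pvVal t v) ∧
    (∀ e ∈ es, PySem.Set.contains summ e.1 = false →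
      pvVal (pvBF summ es fuel t) e.2.1 ≤ max (pvVal (pvBF summ es fuel t) e.1) e.2.2) := by
  intro fuel
  induction fuel with
  | zero => intro t _ _ hf; omega
  | succ fuel ih =>
    intro t hlen hS hf
    rw [pvBF]
    by_cases hch : (es.foldl (pvRelaxEdge summ) (t, false)).2 = true
    · rw [if_pos hch]
      obtain ⟨l1, l2, l3, l4, l5, _⟩ := pv_bf_fold_main n S summ lab hgood hn es t false hes hlen hS h0
      have hphi : pvPhi S (es.foldl (pvRelaxEdge summ) (t, false)).1 < pvPhi S t := by
        rcases l5 hch with h | h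
        · cases h
        · exact h
      obtain ⟨r1, r2, r3⟩ := ih _ l1 l2 (by omega)
      exact ⟨r1, fun v => le_trans (r2 v) (l3 v), r3⟩
    · rw [if_neg hch]
      have h2 : (es.foldl (pvRelaxEdge summ) (t, false)).2 = false := by
        revert hch; cases (es.foldl (pvRelaxEdge summ) (t, false)).2 <;> simp
      have hFe : es.foldl (pvRelaxEdge summ) (t, false) =
          ((es.foldl (pvRelaxEdge summ) (t, false)).1, false) := by
        conv_lhs => rw [show es.foldl (pvRelaxEdge summ) (t, false) =
          ((es.foldl (pvRelaxEdge summ) (t, false)).1, (es.foldl (pvRelaxEdge summ) (t, false)).2) from rfl]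
        rw [h2]
      obtain ⟨heq, hrel⟩ := pv_bf_fold_unchanged summ es t _ hFe
      rw [heq]
      exact ⟨hlen, fun v => le_refl _, hrel⟩

lemma pv_bf_ge (n : Int) (summ : PySem.Set Int) (lab : List Int)
    (hgood : ∀ v ∈ lab, pvGood n v) (hn : 0 ≤ n)
    (es : List (Int × Int × Int)) (F : List Int) (hFlen : F.length = (n + 1).toNat)
    (hes : ∀ e ∈ es, e.1 ∈ lab ∧ e.2.1 ∈ lab)
    (hH : ∀ e ∈ es, PySem.Set.contains summ e.1 = false →
      pvVal F e.2.1 ≤ max (pvVal F e.1) e.2.2) :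
    ∀ (fuel : Nat) (t : List Int), t.length = (n + 1).toNat → pvGe lab t F →
    pvGe lab (pvBF summ es fuel t) F := by
  intro fuel
  induction fuel with
  | zero => intro t _ hge; exact hge
  | succ fuel ih =>
    intro t hlen hge
    rw [pvBF]
    obtain ⟨l1, l2⟩ := pv_bf_fold_ge n summ F lab hgood hn hFlen es t false hes hH hlen hge
    by_cases hch : (es.foldl (pvRelaxEdge summ) (t, false)).2 = true
    · rw [if_pos hch]; exact ih _ l1 l2
    · rw [if_neg hch]; exact l2

-- ---- A-side loop lemmas ----
lemma pv_dij_fold (n : Int) (paths : List (List Int)) (S : List Int) (lab : List Int)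
    (hgood : ∀ v ∈ lab, pvGood n v) (hn : 0 ≤ n) (i now : Int)
    (hiS : i ∈ S) (hnowL : now ∈ lab) (h0 : (0:Int) ∈ S) :
    ∀ (adj : List (Int × Int)) (q : List (Int × Int)) (t : List Int),
    (∀ nw ∈ adj, nw.1 ∈ lab ∧ nw.2 ∈ S) →
    t.length = (n + 1).toNat → pvInS S t →
    (∀ e ∈ q, pvVal t e.2 ≤ e.1 ∧ e.1 ∈ S ∧ e.2 ∈ lab) →
    (∀ v, pvGood n v → pvVal t v ≤ 1000000000) →
    pvVal t now = i →
    ∀ r, r = adj.foldl (pvDStep i) (q, t) →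
    r.2.length = (n + 1).toNat ∧ pvInS S r.2 ∧
    (∀ e ∈ r.1, pvVal r.2 e.2 ≤ e.1 ∧ e.1 ∈ S ∧ e.2 ∈ lab) ∧
    (∀ v, pvGood n v → pvVal r.2 v ≤ 1000000000) ∧
    (∀ v, pvVal r.2 v ≤ pvVal t v) ∧
    pvVal r.2 now = i ∧
    2 * pvPhi S r.2 + r.1.length ≤ 2 * pvPhi S t + q.length ∧
    (∀ nw ∈ adj, pvVal r.2 nw.1 ≤ max i nw.2) ∧
    (∀ v ∈ lab, (pvRelaxedAt paths t v ∨ pvEntryFor n lab t q v) →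
      (pvRelaxedAt paths r.2 v ∨ pvEntryFor n lab r.2 r.1 v)) := by
  intro adj
  induction adj with
  | nil =>
    intro q t _ hlen hS hq h4 hnow r hr
    subst hr
    exact ⟨hlen, hS, hq, h4, fun v => le_refl _, hnow, le_refl _, by simp, fun v _ h => h⟩
  | cons nw adj ih =>
    intro q t hadj hlen hS hq h4 hnow r hr
    obtain ⟨hg1, hwS⟩ := hadj nw (by simp)
    have hadj' : ∀ nw' ∈ adj, nw'.1 ∈ lab ∧ nw'.2 ∈ S :=
      fun nw' h' => hadj nw' (by simp [h'])
    rw [List.foldl_cons] at hr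
    by_cases hlt : max i nw.2 < PySem.List.pyGetD t nw.1 0
    · have hstep : pvDStep i (q, t) nw =
          (pvHeapPush q (max i nw.2, nw.1), PySem.List.pySetD t nw.1 (max i nw.2)) := by
        unfold pvDStep; dsimp only; rw [if_pos hlt]
      rw [hstep] at hr
      obtain ⟨hx0, hx1⟩ := hgood _ hg1
      have hxr1 : -(t.length : Int) ≤ nw.1 := by omega
      have hxr2 : nw.1 < (t.length : Int) := by omega
      have hmS : max i nw.2 ∈ S := by
        rcases max_choice i nw.2 with h | h <;> rw [h]
        · exact hiS
        · exact hwS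
      have hlen1 : (PySem.List.pySetD t nw.1 (max i nw.2)).length = (n + 1).toNat := by
        rw [pv_len_setD]; exact hlen
      have hS1 := pv_inS_set S t nw.1 _ hxr1 hxr2 hS hmS
      have hcases : ∀ (u : Int), pvGood n u →
          pvVal (PySem.List.pySetD t nw.1 (max i nw.2)) u =
            if pvSlot (n + 1).toNat u = pvSlot (n + 1).toNat nw.1 then max i nw.2
            else pvVal t u := by
        intro u hu
        unfold pvVal
        exact pv_getD_setD_cases' n hn t hlen _ _ _ _ ⟨hx0, hx1⟩ hu
      have hvself : pvVal (PySem.List.pySetD t nw.1 (max i nw.2)) nw.1 = max i nw.2 := by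
        rw [hcases nw.1 ⟨hx0, hx1⟩, if_pos rfl]
      have hmono1 := pv_val_set_mono t nw.1 (max i nw.2) hxr1 hxr2 (le_of_lt hlt)
      have hnow1 : pvVal (PySem.List.pySetD t nw.1 (max i nw.2)) now = i := by
        rw [hcases now (hgood _ hnowL)]
        split
        · rename_i hs
          exfalso
          have : pvVal t now = pvVal t nw.1 := by
            unfold pvVal
            exact pv_getD_slot_eq n hn t hlen now nw.1 0 (hgood _ hnowL) ⟨hx0, hx1⟩ hs
          rw [show PySem.List.pyGetD t nw.1 0 = pvVal t nw.1 from rfl, ← this, hnow] at hlt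
          exact absurd hlt (not_lt.mpr (le_max_left _ _))
        · exact hnow
      have hq1 : ∀ e ∈ pvHeapPush q (max i nw.2, nw.1),
          pvVal (PySem.List.pySetD t nw.1 (max i nw.2)) e.2 ≤ e.1 ∧ e.1 ∈ S ∧ e.2 ∈ lab := by
        intro e he
        rcases (pv_mem_heapPush q _ e).mp he with rfl | he
        · exact ⟨le_of_eq hvself, hmS, hg1⟩
        · obtain ⟨he1, he2, he3⟩ := hq e he
          exact ⟨le_trans (hmono1 e.2) he1, he2, he3⟩
      have h41 : ∀ v, pvGood n v → pvVal (PySem.List.pySetD t nw.1 (max i nw.2)) v ≤ 1000000000 := by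
        intro v hv
        exact le_trans (hmono1 v) (h4 v hv)
      obtain ⟨r1, r2, r3, r4, r5, r6, r7, r8, r9⟩ :=
        ih (pvHeapPush q (max i nw.2, nw.1)) _ hadj' hlen1 hS1 hq1 h41 hnow1 r hr
      have hphi1 : pvPhi S (PySem.List.pySetD t nw.1 (max i nw.2)) < pvPhi S t := by
        apply pv_phi_set_lt S t _ _ hxr1 hxr2
        exact pv_rank_lt S _ _ hmS hlt
      refine ⟨r1, r2, r3, r4, ?_, r6, ?_, ?_, ?_⟩
      · intro v; exact le_trans (r5 v) (hmono1 v)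
      · rw [pv_len_heapPush] at r7; omega
      · intro nw' hnw'
        rcases List.mem_cons.mp hnw' with rfl | hnw'
        · exact le_trans (r5 nw'.1) (le_of_eq hvself)
        · exact r8 nw' hnw'
      · intro v hvL hdisj
        apply r9 v hvL
        by_cases hvx : pvSlot (n + 1).toNat v = pvSlot (n + 1).toNat nw.1
        · right
          exact ⟨nw.1, hg1, hvx.symm, by rw [hvself]; exact (pv_mem_heapPush q _ _).mpr (Or.inl rfl)⟩
        · rcases hdisj with hrel | hmem
          · left
            intro u w hmem'
            calc pvVal (PySem.List.pySetD t nw.1 (max i nw.2)) u ≤ pvVal t u := hmono1 u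
              _ ≤ max (pvVal t v) w := hrel u w hmem'
              _ = max (pvVal (PySem.List.pySetD t nw.1 (max i nw.2)) v) w := by
                  rw [hcases v (hgood _ hvL), if_neg hvx]
          · right
            obtain ⟨x, hxL, hxs, hxe⟩ := hmem
            refine ⟨x, hxL, hxs, ?_⟩
            rw [hcases x (hgood _ hxL), if_neg (by rw [hxs]; exact hvx)]
            exact (pv_mem_heapPush q _ _).mpr (Or.inr hxe)
    · have hstep : pvDStep i (q, t) nw = (q, t) := by
        unfold pvDStep; dsimp only; rw [if_neg hlt]
      rw [hstep] at hr
      obtain ⟨r1, r2, r3, r4, r5, r6, r7, r8, r9⟩ :=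
        ih q t hadj' hlen hS hq h4 hnow r hr
      refine ⟨r1, r2, r3, r4, r5, r6, r7, ?_, r9⟩
      intro nw' hnw'
      rcases List.mem_cons.mp hnw' with rfl | hnw'
      · exact le_trans (r5 nw'.1) (not_lt.mp hlt)
      · exact r8 nw' hnw'

lemma pv_dij_main (n : Int) (paths : List (List Int)) (summits : List Int)
    (g : List (List (Int × Int))) (S : List Int) (lab : List Int)
    (hok : pvLabOK n lab summits) (hn : 0 ≤ n) (hSdef : S = pvS paths)
    (hglen : g.length = (n + 1).toNat)
    (hadj : ∀ v ∈ lab, ∀ nw ∈ PySem.List.pyGetD g v [], nw.1 ∈ lab ∧ nw.2 ∈ S)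
    (hadj' : ∀ v ∈ lab, ∀ u w, (v, u, w) ∈ pvEdges paths →
      (u, w) ∈ PySem.List.pyGetD g v []) :
    ∀ (fuel : Nat) (q : List (Int × Int)) (t : List Int),
    t.length = (n + 1).toNat → pvInS S t →
    (∀ e ∈ q, pvVal t e.2 ≤ e.1 ∧ e.1 ∈ S ∧ e.2 ∈ lab) →
    (∀ v, pvGood n v → pvVal t v ≤ 1000000000) →
    (∀ v ∈ lab, v ∉ summits → pvRelaxedAt paths t v ∨ pvEntryFor n lab t q v) →
    2 * pvPhi S t + q.length < fuel →
    (pvDijLoop (PySem.Set.ofList summits) g fuel q t).length = (n + 1).toNat ∧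
    (∀ v, pvVal (pvDijLoop (PySem.Set.ofList summits) g fuel q t) v ≤ pvVal t v) ∧
    (∀ v, pvGood n v → pvVal (pvDijLoop (PySem.Set.ofList summits) g fuel q t) v ≤ 1000000000) ∧
    (∀ v ∈ lab, v ∉ summits →
      pvRelaxedAt paths (pvDijLoop (PySem.Set.ofList summits) g fuel q t) v) := by
  have h0S : (0:Int) ∈ S := by rw [hSdef]; simp [pvS]
  intro fuel
  induction fuel with
  | zero => intro q t _ _ _ _ _ hf; omega
  | succ fuel ih =>
    intro q t hlen hS hq h4 h5 hf
    match q with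
    | [] =>
      rw [pvDijLoop]
      refine ⟨hlen, fun v => le_refl _, h4, ?_⟩
      intro v hv hvs
      rcases h5 v hv hvs with hrel | hmem
      · exact hrel
      · obtain ⟨x, _, _, hxe⟩ := hmem
        simp at hxe
    | e :: rest =>
      rw [pvDijLoop]
      by_cases hcond : (PySem.Set.contains (PySem.Set.ofList summits) e.2 ||
          decide (PySem.List.pyGetD t e.2 0 < e.1)) = true
      · rw [if_pos hcond]
        obtain ⟨hqe1, hqe2, hqe3⟩ := hq e (by simp)
        have h5' : ∀ v ∈ lab, v ∉ summits →
            pvRelaxedAt paths t v ∨ pvEntryFor n lab t rest v := by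
          intro v hv hvs
          rcases h5 v hv hvs with hrel | hmem
          · exact Or.inl hrel
          · obtain ⟨x, hxL, hxs, hxe⟩ := hmem
            rcases List.mem_cons.mp hxe with heq | hmem'
            · exfalso
              have hx2 : x = e.2 := congrArg Prod.snd heq
              have hx1 : pvVal t x = e.1 := congrArg Prod.fst heq
              rcases Bool.or_eq_true_iff.mp hcond with hc | hc
              · have he2s : e.2 ∈ summits := (pv_contains_summ summits e.2).mp hc
                have : x ∈ summits ↔ v ∈ summits := hok.2 x hxL v hv hxs
                exact hvs (this.mp (hx2 ▸ he2s))
              · have hlt : PySem.List.pyGetD t e.2 0 < e.1 := of_decide_eq_true hc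
                rw [← hx2, show PySem.List.pyGetD t x 0 = pvVal t x from rfl, hx1] at hlt
                exact absurd hlt (lt_irrefl _)
            · exact Or.inr ⟨x, hxL, hxs, hmem'⟩
        have hq' : ∀ e' ∈ rest, pvVal t e'.2 ≤ e'.1 ∧ e'.1 ∈ S ∧ e'.2 ∈ lab :=
          fun e' h' => hq e' (by simp [h'])
        exact ih rest t hlen hS hq' h4 h5' (by simp at hf ⊢; omega)
      · rw [if_neg hcond]
        have hnlt : ¬ (PySem.List.pyGetD t e.2 0 < e.1) := by
          intro hcon
          apply hcond
          simp [hcon]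
        obtain ⟨hqe1, hqe2, hqe3⟩ := hq e (by simp)
        have hnow : pvVal t e.2 = e.1 := le_antisymm hqe1 (not_lt.mp hnlt)
        have hq' : ∀ e' ∈ rest, pvVal t e'.2 ≤ e'.1 ∧ e'.1 ∈ S ∧ e'.2 ∈ lab :=
          fun e' h' => hq e' (by simp [h'])
        obtain ⟨f1, f2, f3, f4, f5, f6, f7, f8, f9⟩ :=
          pv_dij_fold n paths S lab hok.1 hn e.1 e.2 hqe2 hqe3 h0S
            (PySem.List.pyGetD g e.2 []) rest t (hadj e.2 hqe3) hlen hS hq' h4 hnow _ rfl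
        have h5'' : ∀ v ∈ lab, v ∉ summits →
            pvRelaxedAt paths ((PySem.List.pyGetD g e.2 []).foldl (pvDStep e.1) (rest, t)).2 v ∨
            pvEntryFor n lab ((PySem.List.pyGetD g e.2 []).foldl (pvDStep e.1) (rest, t)).2
              ((PySem.List.pyGetD g e.2 []).foldl (pvDStep e.1) (rest, t)).1 v := by
          intro v hv hvs
          by_cases hvnow : pvSlot (n + 1).toNat v = pvSlot (n + 1).toNat e.2
          · left
            intro u w hmem'
            have hgv : PySem.List.pyGetD g v [] = PySem.List.pyGetD g e.2 [] :=
              pv_getD_slot_eq n hn g hglen v e.2 [] (hok.1 _ hv) (hok.1 _ hqe3) hvnow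
            have hmem'' : (u, w) ∈ PySem.List.pyGetD g e.2 [] := by
              rw [← hgv]
              exact hadj' v hv u w hmem'
            have hval : pvVal ((PySem.List.pyGetD g e.2 []).foldl (pvDStep e.1) (rest, t)).2 v =
                pvVal ((PySem.List.pyGetD g e.2 []).foldl (pvDStep e.1) (rest, t)).2 e.2 := by
              unfold pvVal
              exact pv_getD_slot_eq n hn _ f1 v e.2 0 (hok.1 _ hv) (hok.1 _ hqe3) hvnow
            rw [hval, f6]
            exact f8 (u, w) hmem''
          · apply f9 v hv
            rcases h5 v hv hvs with hrel | hmem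
            · exact Or.inl hrel
            · obtain ⟨x, hxL, hxs, hxe⟩ := hmem
              rcases List.mem_cons.mp hxe with heq | hmem'
              · exfalso
                have hx2 : x = e.2 := congrArg Prod.snd heq
                exact hvnow (by rw [← hxs, hx2])
              · exact Or.inr ⟨x, hxL, hxs, hmem'⟩
        obtain ⟨m1, m2, m3, m4⟩ := ih _ _ f1 f2 f3 f4 h5'' (by simp at hf ⊢; omega)
        exact ⟨m1, fun v => le_trans (m2 v) (f5 v), m3, m4⟩

lemma pv_dij_fold_ge (n : Int) (paths : List (List Int)) (summits : List Int)
    (H : List Int) (lab : List Int) (hok : pvLabOK n lab summits) (hn : 0 ≤ n)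
    (hHlen : H.length = (n + 1).toNat)
    (i now : Int) (hnowL : now ∈ lab) (hnowS : now ∉ summits) (hiH : pvVal H now ≤ i)
    (hH : ∀ u v w, (u, v, w) ∈ pvEdges paths → u ∉ summits →
      pvVal H v ≤ max (pvVal H u) w) :
    ∀ (adj : List (Int × Int)) (q : List (Int × Int)) (t : List Int),
    (∀ nw ∈ adj, nw.1 ∈ lab ∧ ∃ src ∈ lab,
      pvSlot (n + 1).toNat src = pvSlot (n + 1).toNat now ∧ (src, nw.1, nw.2) ∈ pvEdges paths) →
    t.length = (n + 1).toNat →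
    (∀ e ∈ q, pvVal H e.2 ≤ e.1 ∧ e.2 ∈ lab) → pvGe lab t H →
    ∀ r, r = adj.foldl (pvDStep i) (q, t) →
    r.2.length = (n + 1).toNat ∧ (∀ e ∈ r.1, pvVal H e.2 ≤ e.1 ∧ e.2 ∈ lab) ∧ pvGe lab r.2 H := by
  intro adj
  induction adj with
  | nil => intro q t _ hlen hq hge r hr; subst hr; exact ⟨hlen, hq, hge⟩
  | cons nw adj ih =>
    intro q t hadj hlen hq hge r hr
    obtain ⟨hg1, src, hsrcL, hsrcS, hmemE⟩ := hadj nw (by simp)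
    have hadj' : ∀ nw' ∈ adj, nw'.1 ∈ lab ∧ ∃ src ∈ lab,
        pvSlot (n + 1).toNat src = pvSlot (n + 1).toNat now ∧ (src, nw'.1, nw'.2) ∈ pvEdges paths :=
      fun nw' h' => hadj nw' (by simp [h'])
    rw [List.foldl_cons] at hr
    have hsrcNS : src ∉ summits := by
      intro hcon
      exact hnowS ((hok.2 src hsrcL now hnowL hsrcS).mp hcon)
    have hHx : pvVal H nw.1 ≤ max i nw.2 := by
      calc pvVal H nw.1 ≤ max (pvVal H src) nw.2 := hH src nw.1 nw.2 hmemE hsrcNS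
        _ = max (pvVal H now) nw.2 := by
            unfold pvVal
            rw [pv_getD_slot_eq n hn H hHlen src now 0 (hok.1 _ hsrcL) (hok.1 _ hnowL) hsrcS]
        _ ≤ max i nw.2 := max_le_max hiH (le_refl _)
    by_cases hlt : max i nw.2 < PySem.List.pyGetD t nw.1 0
    · rw [show pvDStep i (q, t) nw =
          (pvHeapPush q (max i nw.2, nw.1), PySem.List.pySetD t nw.1 (max i nw.2)) from by
          unfold pvDStep; dsimp only; rw [if_pos hlt]] at hr
      apply ih _ _ hadj' (by rw [pv_len_setD]; exact hlen) _ _ r hr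
      · intro e he
        rcases (pv_mem_heapPush q _ e).mp he with rfl | he
        · exact ⟨hHx, hg1⟩
        · exact hq e he
      · intro v hvL
        unfold pvVal
        rw [pv_getD_setD_cases' n hn t hlen _ _ _ _ (hok.1 _ hg1) (hok.1 _ hvL)]
        split
        · rename_i hs
          calc PySem.List.pyGetD H v 0
              = PySem.List.pyGetD H nw.1 0 :=
                pv_getD_slot_eq n hn H hHlen v nw.1 0 (hok.1 _ hvL) (hok.1 _ hg1) hs
            _ ≤ max i nw.2 := hHx
        · exact hge v hvL
    · rw [show pvDStep i (q, t) nw = (q, t) from by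
          unfold pvDStep; dsimp only; rw [if_neg hlt]] at hr
      exact ih q t hadj' hlen hq hge r hr

lemma pv_dij_ge (n : Int) (paths : List (List Int)) (summits : List Int)
    (g : List (List (Int × Int))) (H : List Int) (lab : List Int)
    (hok : pvLabOK n lab summits) (hn : 0 ≤ n) (hHlen : H.length = (n + 1).toNat)
    (hadj : ∀ v ∈ lab, ∀ nw ∈ PySem.List.pyGetD g v [], nw.1 ∈ lab ∧ ∃ src ∈ lab,
      pvSlot (n + 1).toNat src = pvSlot (n + 1).toNat v ∧ (src, nw.1, nw.2) ∈ pvEdges paths)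
    (hH : ∀ u v w, (u, v, w) ∈ pvEdges paths → u ∉ summits →
      pvVal H v ≤ max (pvVal H u) w) :
    ∀ (fuel : Nat) (q : List (Int × Int)) (t : List Int),
    t.length = (n + 1).toNat →
    (∀ e ∈ q, pvVal H e.2 ≤ e.1 ∧ e.2 ∈ lab) → pvGe lab t H →
    pvGe lab (pvDijLoop (PySem.Set.ofList summits) g fuel q t) H := by
  intro fuel
  induction fuel with
  | zero => intro q t _ _ hge; rw [pvDijLoop]; exact hge
  | succ fuel ih =>
    intro q t hlen hq hge
    match q with
    | [] => rw [pvDijLoop]; exact hge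
    | e :: rest =>
      rw [pvDijLoop]
      by_cases hcond : (PySem.Set.contains (PySem.Set.ofList summits) e.2 ||
          decide (PySem.List.pyGetD t e.2 0 < e.1)) = true
      · rw [if_pos hcond]
        exact ih rest t hlen (fun e' h' => hq e' (by simp [h'])) hge
      · rw [if_neg hcond]
        have hcsf : PySem.Set.contains (PySem.Set.ofList summits) e.2 = false := by
          revert hcond; cases PySem.Set.contains (PySem.Set.ofList summits) e.2 <;> simp
        have hnowS : e.2 ∉ summits := by
          intro hcon
          rw [(pv_contains_summ summits e.2).mpr hcon] at hcsf
          cases hcsf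
        obtain ⟨hqe1, hqe2⟩ := hq e (by simp)
        obtain ⟨f1, f2, f3⟩ :=
          pv_dij_fold_ge n paths summits H lab hok hn hHlen e.1 e.2 hqe2 hnowS hqe1 hH
            (PySem.List.pyGetD g e.2 []) rest t (hadj e.2 hqe2) hlen
            (fun e' h' => hq e' (by simp [h'])) hge _ rfl
        exact ih _ _ f1 f2 f3

-- ---- init folds ----
lemma pv_initA (n : Int) (paths : List (List Int)) (summits : List Int) (H : List Int)
    (lab : List Int) (hok : pvLabOK n lab summits) (hn : 0 ≤ n)
    (hHlen : H.length = (n + 1).toNat) :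
    ∀ (gs : List Int) (q : List (Int × Int)) (t : List Int),
    (∀ x ∈ gs, x ∈ lab) → (∀ x ∈ gs, pvVal H x ≤ 0) →
    t.length = (n + 1).toNat → pvInS (pvS paths) t →
    (∀ e ∈ q, pvVal t e.2 ≤ e.1 ∧ e.1 ∈ pvS paths ∧ e.2 ∈ lab) →
    (∀ e ∈ q, pvVal H e.2 ≤ e.1) →
    (∀ v, pvGood n v → pvVal t v = 1000000000 ∨ pvVal t v = 0) →
    (∀ v ∈ lab, pvRelaxedAt paths t v ∨ pvEntryFor n lab t q v) →
    pvGe lab t H →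
    ∀ r, r = gs.foldl (fun (st : List (Int × Int) × List Int) gate =>
        (pvHeapPush st.1 (0, gate), PySem.List.pySetD st.2 gate 0)) (q, t) →
    r.2.length = (n + 1).toNat ∧ pvInS (pvS paths) r.2 ∧
    (∀ e ∈ r.1, pvVal r.2 e.2 ≤ e.1 ∧ e.1 ∈ pvS paths ∧ e.2 ∈ lab) ∧
    (∀ e ∈ r.1, pvVal H e.2 ≤ e.1) ∧
    (∀ v, pvGood n v → pvVal r.2 v ≤ 1000000000) ∧
    (∀ v ∈ lab, pvRelaxedAt paths r.2 v ∨ pvEntryFor n lab r.2 r.1 v) ∧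
    (∀ x, pvGood n x → pvVal t x = 0 → pvVal r.2 x = 0) ∧
    (∀ x ∈ gs, pvVal r.2 x = 0) ∧
    pvGe lab r.2 H ∧
    r.1.length = q.length + gs.length := by
  intro gs
  induction gs with
  | nil =>
    intro q t hgs _ hlen hS hq hqH hvals h5 hge r hr
    subst hr
    simp only [List.foldl_nil]
    refine ⟨hlen, hS, hq, hqH, ?_, h5, fun x _ h => h, by simp, hge, by simp⟩
    intro v hv
    rcases hvals v hv with h | h <;> rw [h] <;> omega
  | cons gate gs ih =>
    intro q t hgs hgsH hlen hS hq hqH hvals h5 hge r hr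
    have hgateL : gate ∈ lab := hgs gate (by simp)
    have hgg : pvGood n gate := hok.1 _ hgateL
    obtain ⟨hgt0, hgt1⟩ := hok.1 _ hgateL
    have hgateH : pvVal H gate ≤ 0 := hgsH gate (by simp)
    have hgs' : ∀ x ∈ gs, x ∈ lab := fun x h => hgs x (by simp [h])
    have hgsH' : ∀ x ∈ gs, pvVal H x ≤ 0 := fun x h => hgsH x (by simp [h])
    rw [List.foldl_cons] at hr
    have hxr1 : -(t.length : Int) ≤ gate := by omega
    have hxr2 : gate < (t.length : Int) := by omega
    have hcases : ∀ (u : Int), pvGood n u →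
        pvVal (PySem.List.pySetD t gate 0) u =
          if pvSlot (n + 1).toNat u = pvSlot (n + 1).toNat gate then 0 else pvVal t u := by
      intro u hu
      unfold pvVal
      exact pv_getD_setD_cases' n hn t hlen _ _ _ _ hgg hu
    have hvself : pvVal (PySem.List.pySetD t gate 0) gate = 0 := by
      rw [hcases gate hgg, if_pos rfl]
    have hgate0le : (0:Int) ≤ pvVal t gate := by
      rcases hvals gate hgg with h | h <;> rw [h] <;> omega
    have hmono1 := pv_val_set_mono t gate 0 hxr1 hxr2 hgate0le
    have hlen1 : (PySem.List.pySetD t gate 0).length = (n + 1).toNat := by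
      rw [pv_len_setD]; exact hlen
    have hS1 : pvInS (pvS paths) (PySem.List.pySetD t gate 0) :=
      pv_inS_set _ _ _ _ hxr1 hxr2 hS (by simp [pvS])
    have hq1 : ∀ e ∈ pvHeapPush q (0, gate),
        pvVal (PySem.List.pySetD t gate 0) e.2 ≤ e.1 ∧ e.1 ∈ pvS paths ∧ e.2 ∈ lab := by
      intro e he
      rcases (pv_mem_heapPush q _ e).mp he with rfl | he
      · exact ⟨le_of_eq hvself, by simp [pvS], hgateL⟩
      · obtain ⟨he1, he2, he3⟩ := hq e he
        exact ⟨le_trans (hmono1 e.2) he1, he2, he3⟩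
    have hqH1 : ∀ e ∈ pvHeapPush q (0, gate), pvVal H e.2 ≤ e.1 := by
      intro e he
      rcases (pv_mem_heapPush q _ e).mp he with rfl | he
      · exact hgateH
      · exact hqH e he
    have hvals1 : ∀ v, pvGood n v →
        pvVal (PySem.List.pySetD t gate 0) v = 1000000000 ∨ pvVal (PySem.List.pySetD t gate 0) v = 0 := by
      intro v hv
      rw [hcases v hv]
      split
      · right; rfl
      · exact hvals v hv
    have h51 : ∀ v ∈ lab,
        pvRelaxedAt paths (PySem.List.pySetD t gate 0) v ∨
        pvEntryFor n lab (PySem.List.pySetD t gate 0) (pvHeapPush q (0, gate)) v := by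
      intro v hvL
      by_cases hvx : pvSlot (n + 1).toNat v = pvSlot (n + 1).toNat gate
      · right
        exact ⟨gate, hgateL, hvx.symm, by rw [hvself]; exact (pv_mem_heapPush q _ _).mpr (Or.inl rfl)⟩
      · rcases h5 v hvL with hrel | hmem
        · left
          intro u w hmem'
          calc pvVal (PySem.List.pySetD t gate 0) u ≤ pvVal t u := hmono1 u
            _ ≤ max (pvVal t v) w := hrel u w hmem'
            _ = max (pvVal (PySem.List.pySetD t gate 0) v) w := by
                rw [hcases v (hok.1 _ hvL), if_neg hvx]
        · right
          obtain ⟨x, hxL, hxs, hxe⟩ := hmem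
          refine ⟨x, hxL, hxs, ?_⟩
          rw [hcases x (hok.1 _ hxL), if_neg (by rw [hxs]; exact hvx)]
          exact (pv_mem_heapPush q _ _).mpr (Or.inr hxe)
    have hge1 : pvGe lab (PySem.List.pySetD t gate 0) H := by
      intro v hvL
      rw [hcases v (hok.1 _ hvL)]
      split
      · rename_i hs
        calc pvVal H v = pvVal H gate := by
              unfold pvVal
              exact pv_getD_slot_eq n hn H hHlen v gate 0 (hok.1 _ hvL) hgg hs
          _ ≤ 0 := hgateH
      · exact hge v hvL
    obtain ⟨r1, r2, r3, r4, r5, r6, r7, r8, r9, r10⟩ :=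
      ih (pvHeapPush q (0, gate)) (PySem.List.pySetD t gate 0)
        hgs' hgsH' hlen1 hS1 hq1 hqH1 hvals1 h51 hge1 r hr
    refine ⟨r1, r2, r3, r4, r5, r6, ?_, ?_, r9, ?_⟩
    · intro x hxg h0x
      apply r7 x hxg
      rw [hcases x hxg]
      split
      · rfl
      · exact h0x
    · intro x hx
      rcases List.mem_cons.mp hx with rfl | hx
      · exact r7 x hgg hvself
      · exact r8 x hx
    · rw [r10, pv_len_heapPush]
      simp only [List.length_cons]
      omega

lemma pv_initB (n : Int) (paths : List (List Int)) (summits : List Int) (F : List Int)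
    (lab : List Int) (hok : pvLabOK n lab summits) (hn : 0 ≤ n)
    (hFlen : F.length = (n + 1).toNat) :
    ∀ (gs : List Int) (t : List Int),
    (∀ x ∈ gs, x ∈ lab) → (∀ x ∈ gs, pvVal F x ≤ 0) →
    t.length = (n + 1).toNat → pvInS (pvS paths) t →
    (∀ v, pvGood n v → pvVal t v = 1000000000 ∨ pvVal t v = 0) →
    pvGe lab t F →
    ∀ r, r = gs.foldl (fun t gate => PySem.List.pySetD t gate 0) t →
    r.length = (n + 1).toNat ∧ pvInS (pvS paths) r ∧
    (∀ v, pvGood n v → pvVal r v ≤ 1000000000) ∧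
    (∀ x ∈ gs, pvVal r x = 0) ∧
    (∀ x, pvGood n x → pvVal t x = 0 → pvVal r x = 0) ∧
    pvGe lab r F := by
  intro gs
  induction gs with
  | nil =>
    intro t hgs _ hlen hS hvals hge r hr
    subst hr
    refine ⟨hlen, hS, ?_, by simp, fun x _ h => h, hge⟩
    intro v hv
    rcases hvals v hv with h | h <;> rw [h] <;> omega
  | cons gate gs ih =>
    intro t hgs hgsF hlen hS hvals hge r hr
    have hgateL : gate ∈ lab := hgs gate (by simp)
    have hgg : pvGood n gate := hok.1 _ hgateL
    obtain ⟨hgt0, hgt1⟩ := hok.1 _ hgateL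
    have hgateF : pvVal F gate ≤ 0 := hgsF gate (by simp)
    rw [List.foldl_cons] at hr
    have hxr1 : -(t.length : Int) ≤ gate := by omega
    have hxr2 : gate < (t.length : Int) := by omega
    have hcases : ∀ (u : Int), pvGood n u →
        pvVal (PySem.List.pySetD t gate 0) u =
          if pvSlot (n + 1).toNat u = pvSlot (n + 1).toNat gate then 0 else pvVal t u := by
      intro u hu
      unfold pvVal
      exact pv_getD_setD_cases' n hn t hlen _ _ _ _ hgg hu
    have hvself : pvVal (PySem.List.pySetD t gate 0) gate = 0 := by
      rw [hcases gate hgg, if_pos rfl]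
    have hvals1 : ∀ v, pvGood n v →
        pvVal (PySem.List.pySetD t gate 0) v = 1000000000 ∨ pvVal (PySem.List.pySetD t gate 0) v = 0 := by
      intro v hv
      rw [hcases v hv]
      split
      · right; rfl
      · exact hvals v hv
    have hge1 : pvGe lab (PySem.List.pySetD t gate 0) F := by
      intro v hvL
      rw [hcases v (hok.1 _ hvL)]
      split
      · rename_i hs
        calc pvVal F v = pvVal F gate := by
              unfold pvVal
              exact pv_getD_slot_eq n hn F hFlen v gate 0 (hok.1 _ hvL) hgg hs
          _ ≤ 0 := hgateF
      · exact hge v hvL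
    obtain ⟨r1, r2, r3, r4, r5, r6⟩ := ih (PySem.List.pySetD t gate 0)
      (fun x h => hgs x (by simp [h])) (fun x h => hgsF x (by simp [h]))
      (by rw [pv_len_setD]; exact hlen)
      (pv_inS_set _ _ _ _ hxr1 hxr2 hS (by simp [pvS]))
      hvals1 hge1 r hr
    refine ⟨r1, r2, r3, ?_, ?_, r6⟩
    · intro x hx
      rcases List.mem_cons.mp hx with rfl | hx
      · exact r5 x hgg hvself
      · exact r4 x hx
    · intro x hxg h0x
      apply r5 x hxg
      rw [hcases x hxg]
      split
      · rfl
      · exact h0x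

-- ---- selection lemmas ----
def pvBefore (a b : Int × Int) : Bool :=
  decide (a.2 < b.2) || (!decide (b.2 < a.2) && decide (a.1 < b.1))

lemma pv_before_iff (a b : Int × Int) :
    pvBefore a b = true ↔ (a.2 < b.2 ∨ (a.2 ≤ b.2 ∧ a.1 < b.1)) := by
  unfold pvBefore
  simp [not_lt]

lemma pv_before_false_iff (a b : Int × Int) :
    pvBefore a b = false ↔ ¬(a.2 < b.2 ∨ (a.2 ≤ b.2 ∧ a.1 < b.1)) := by
  rw [← pv_before_iff]
  cases pvBefore a b <;> simp

lemma pv_before_asymm (a b : Int × Int) (h : pvBefore a b = true) : pvBefore b a = false := by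
  rw [pv_before_false_iff]
  have := (pv_before_iff a b).mp h
  omega

lemma pv_before_nb_trans (a b c : Int × Int) (h1 : pvBefore b a = false) (h2 : pvBefore c b = false) :
    pvBefore c a = false := by
  rw [pv_before_false_iff] at *
  omega

lemma pv_insertBy_eq (x y : Int × Int) (ys : List (Int × Int)) :
    PySem.List.insertBy pvBefore x (y :: ys) =
      if pvBefore x y = true then x :: y :: ys else y :: PySem.List.insertBy pvBefore x ys := rfl

lemma pv_insertBy_pairwise (x : Int × Int) :
    ∀ l : List (Int × Int), l.Pairwise (fun a b => pvBefore b a = false) →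
    (PySem.List.insertBy pvBefore x l).Pairwise (fun a b => pvBefore b a = false) := by
  intro l
  induction l with
  | nil => intro _; simp [PySem.List.insertBy]
  | cons y ys ih =>
    intro h
    rw [List.pairwise_cons] at h
    obtain ⟨hy, hys⟩ := h
    rw [pv_insertBy_eq]
    by_cases hxy : pvBefore x y = true
    · rw [if_pos hxy]
      rw [List.pairwise_cons]
      constructor
      · intro z hz
        rcases List.mem_cons.mp hz with rfl | hz
        · exact pv_before_asymm x z hxy
        · exact pv_before_nb_trans _ _ _ (pv_before_asymm x y hxy) (hy z hz)
      · rw [List.pairwise_cons]; exact ⟨hy, hys⟩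
    · rw [if_neg hxy]
      rw [List.pairwise_cons]
      constructor
      · intro z hz
        rw [PySem.List.mem_insertBy] at hz
        rcases hz with hz1 | hz
        · rw [hz1]; revert hxy; cases pvBefore x y <;> simp
        · exact hy z hz
      · exact ih hys

lemma pv_foldl_insertBy_pairwise (l : List (Int × Int)) :
    ∀ acc : List (Int × Int), acc.Pairwise (fun a b => pvBefore b a = false) →
    (l.foldl (fun acc x => PySem.List.insertBy pvBefore x acc) acc).Pairwise
      (fun a b => pvBefore b a = false) := by
  induction l with
  | nil => intro acc h; exact h
  | cons x l ih =>
    intro acc h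
    rw [List.foldl_cons]
    exact ih _ (pv_insertBy_pairwise x acc h)

lemma pv_sorted2_head (l : List (Int × Int)) (m : Int × Int) (tl : List (Int × Int))
    (h : PySem.List.sorted2 l (fun x => x.2) (fun x => x.1) false = m :: tl) :
    m ∈ l ∧ ∀ y ∈ l, m.2 < y.2 ∨ (m.2 = y.2 ∧ m.1 ≤ y.1) := by
  have hdef : PySem.List.sorted2 l (fun x => x.2) (fun x => x.1) false =
      l.foldl (fun acc x => PySem.List.insertBy pvBefore x acc) [] := rfl
  have hperm := PySem.List.sorted2_perm l (fun x => x.2) (fun x => x.1) false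
  rw [h] at hperm
  have hpw := pv_foldl_insertBy_pairwise l [] (by simp)
  rw [← hdef, h] at hpw
  rw [List.pairwise_cons] at hpw
  constructor
  · exact hperm.mem_iff.mp (by simp)
  · intro y hy
    have hy' : y ∈ m :: tl := hperm.symm.mem_iff.mp hy
    rcases List.mem_cons.mp hy' with rfl | hy'
    · right; exact ⟨rfl, le_refl _⟩
    · have := hpw.1 y hy'
      rw [pv_before_false_iff] at this
      omega

lemma pv_fold_best (t : List Int) : ∀ (l : List Int) (a : Int),
    ∀ r, r = l.foldl (fun best v =>
      if PySem.List.pyGetD t v 0 < PySem.List.pyGetD t best 0 ∨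
         (PySem.List.pyGetD t v 0 = PySem.List.pyGetD t best 0 ∧ v < best) then v else best) a →
    (r = a ∨ r ∈ l) ∧
    (PySem.List.pyGetD t r 0 < PySem.List.pyGetD t a 0 ∨
      (PySem.List.pyGetD t r 0 = PySem.List.pyGetD t a 0 ∧ r ≤ a)) ∧
    (∀ v ∈ l, PySem.List.pyGetD t r 0 < PySem.List.pyGetD t v 0 ∨
      (PySem.List.pyGetD t r 0 = PySem.List.pyGetD t v 0 ∧ r ≤ v)) := by
  intro l
  induction l with
  | nil =>
    intro a r hr
    subst hr
    exact ⟨Or.inl rfl, Or.inr ⟨rfl, le_refl _⟩, by simp⟩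
  | cons v l ih =>
    intro a r hr
    rw [List.foldl_cons] at hr
    by_cases hc : PySem.List.pyGetD t v 0 < PySem.List.pyGetD t a 0 ∨
        (PySem.List.pyGetD t v 0 = PySem.List.pyGetD t a 0 ∧ v < a)
    · rw [if_pos hc] at hr
      obtain ⟨i1, i2, i3⟩ := ih v r hr
      refine ⟨?_, ?_, ?_⟩
      · rcases i1 with rfl | h
        · right; simp
        · right; simp [h]
      · rcases i2 with h | h <;> rcases hc with h' | h'
        · left; omega
        · left; omega
        · left; omega
        · right; constructor <;> omega
      · intro u hu
        rcases List.mem_cons.mp hu with rfl | hu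
        · exact i2
        · exact i3 u hu
    · rw [if_neg hc] at hr
      obtain ⟨i1, i2, i3⟩ := ih a r hr
      push_neg at hc
      refine ⟨?_, i2, ?_⟩
      · rcases i1 with rfl | h
        · left; rfl
        · right; simp [h]
      · intro u hu
        rcases List.mem_cons.mp hu with rfl | hu
        · rcases i2 with h | h
          · left; omega
          · rcases lt_trichotomy (PySem.List.pyGetD t r 0) (PySem.List.pyGetD t u 0) with h' | h' | h'
            · left; exact h'
            · right; refine ⟨h', ?_⟩
              have := hc.2  -- a ≤ u side: pyGetD u = pyGetD a → a ≤ u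
              omega
            · exfalso; omega
        · exact i3 u hu

-- ===== VERDICT (by name: the statement is the Claim_ definition above) =====
theorem solution_spec : Claim_equal_solution := by
  intro n paths gates summits hdom hpre
  unfold Spec_solution
  obtain ⟨hn, hrows, hsumne, hrangeP, hconsP⟩ := hpre
  set lab := pvLabels paths gates summits with hlabdef
  have hok : pvLabOK n lab summits := by
    refine ⟨hrangeP, ?_⟩
    intro x hx y hy hs
    apply hconsP x hx y hy
    obtain ⟨hx1, hx2⟩ := hrangeP x hx
    obtain ⟨hy1, hy2⟩ := hrangeP y hy
    have hxm := Int.emod_nonneg x (show (n+1 : Int) ≠ 0 by omega)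
    have hym := Int.emod_nonneg y (show (n+1 : Int) ≠ 0 by omega)
    unfold pvSlot at hs
    have hNe : (((n + 1).toNat : Nat) : Int) = n + 1 := by omega
    rw [hNe] at hs
    omega
  have hrowL : ∀ row ∈ paths,
      PySem.List.pyGetD row 0 0 ∈ lab ∧ PySem.List.pyGetD row 1 0 ∈ lab := by
    intro row hr
    constructor <;>
    · rw [hlabdef]
      unfold pvLabels
      rw [List.mem_append, List.mem_append]
      exact Or.inl (Or.inl (List.mem_flatMap.mpr ⟨row, hr, by simp⟩))
  have hgatesL : ∀ x ∈ gates, x ∈ lab := by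
    intro x hx
    rw [hlabdef]; unfold pvLabels
    rw [List.mem_append, List.mem_append]
    exact Or.inl (Or.inr hx)
  have hsummL : ∀ x ∈ summits, x ∈ lab := by
    intro x hx
    rw [hlabdef]; unfold pvLabels
    rw [List.mem_append]
    exact Or.inr hx
  have hedge := pv_goodE paths lab hrowL
  have hSlen : (pvS paths).length = paths.length + 2 := by simp [pvS]
  have h0S : (0:Int) ∈ pvS paths := by simp [pvS]
  unfold solution solution_alt
  simp only [pv_summA, pv_edgesB, List.nil_append]
  set gA := paths.foldl pvAddEdges (List.replicate (n + 1).toNat ([] : List (Int × Int))) with hgAdef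
  set qi := gates.foldl (fun (st : List (Int × Int) × List Int) gate =>
      (pvHeapPush st.1 (0, gate), PySem.List.pySetD st.2 gate 0))
      (([] : List (Int × Int)), List.replicate (n + 1).toNat (1000000000 : Int)) with hqidef
  set F := pvDijLoop (PySem.Set.ofList summits) gA
      (2 * (n + 1).toNat * (paths.length + 2) + gates.length + 1) qi.1 qi.2 with hFdef
  set t1 := gates.foldl (fun t gate => PySem.List.pySetD t gate 0)
      (List.replicate (n + 1).toNat (1000000000 : Int)) with ht1def
  set H := pvBF (PySem.Set.ofList summits) (pvEdges paths)
      ((n + 1).toNat * (paths.length + 2) + 1) t1 with hHdef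
  -- adjacency facts
  obtain ⟨hglen0, hgval0⟩ := pv_adjA n paths lab hok.1 hn hrowL (List.replicate (n + 1).toNat []) (by simp)
  rw [← hgAdef] at hgval0 hglen0
  have hgval : ∀ v, pvGood n v → PySem.List.pyGetD gA v [] = pvOut n paths v := by
    intro v hv
    obtain ⟨hv1, hv2⟩ := hv
    rw [hgval0 v ⟨hv1, hv2⟩, pv_getD_replicate _ _ _ _ (by simp; omega) (by simp; omega),
      List.nil_append]
  have hadjA : ∀ v ∈ lab, ∀ nw ∈ PySem.List.pyGetD gA v [], nw.1 ∈ lab ∧ nw.2 ∈ pvS paths := by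
    intro v hv nw hnw
    rw [hgval v (hok.1 _ hv)] at hnw
    obtain ⟨src, hs, hmem⟩ := (pv_mem_pvOut n paths v nw.1 nw.2).mp hnw
    exact ⟨(hedge _ hmem).2.1, (hedge _ hmem).2.2⟩
  have hadjA2 : ∀ v ∈ lab, ∀ nw ∈ PySem.List.pyGetD gA v [], nw.1 ∈ lab ∧ ∃ src ∈ lab,
      pvSlot (n + 1).toNat src = pvSlot (n + 1).toNat v ∧ (src, nw.1, nw.2) ∈ pvEdges paths := by
    intro v hv nw hnw
    rw [hgval v (hok.1 _ hv)] at hnw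
    obtain ⟨src, hs, hmem⟩ := (pv_mem_pvOut n paths v nw.1 nw.2).mp hnw
    exact ⟨(hedge _ hmem).2.1, src, (hedge _ hmem).1, hs, hmem⟩
  have hadjA' : ∀ v ∈ lab, ∀ u w, (v, u, w) ∈ pvEdges paths →
      (u, w) ∈ PySem.List.pyGetD gA v [] := by
    intro v hv u w hm
    rw [hgval v (hok.1 _ hv)]
    exact (pv_mem_pvOut n paths v u w).mpr ⟨v, rfl, hm⟩
  -- initial array facts
  have hrep_len : (List.replicate (n + 1).toNat (1000000000 : Int)).length = (n + 1).toNat := by simp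
  have hrep_inS : pvInS (pvS paths) (List.replicate (n + 1).toNat (1000000000 : Int)) := by
    intro x hx; rw [List.eq_of_mem_replicate hx]; simp [pvS]
  have hrep_val : ∀ v, pvGood n v →
      pvVal (List.replicate (n + 1).toNat (1000000000 : Int)) v = 1000000000 := by
    intro v hv
    obtain ⟨hv1, hv2⟩ := hv
    exact pv_getD_replicate _ _ _ _ (by omega) (by omega)
  have hrep_vals : ∀ v, pvGood n v →
      pvVal (List.replicate (n + 1).toNat (1000000000 : Int)) v = 1000000000 ∨
      pvVal (List.replicate (n + 1).toNat (1000000000 : Int)) v = 0 :=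
    fun v hv => Or.inl (hrep_val v hv)
  have hrep_relax : ∀ v ∈ lab,
      pvRelaxedAt paths (List.replicate (n + 1).toNat (1000000000 : Int)) v ∨
      pvEntryFor n lab (List.replicate (n + 1).toNat (1000000000 : Int)) [] v := by
    intro v hv
    left
    intro u w hm
    rw [hrep_val u (hok.1 _ (hedge _ hm).2.1), hrep_val v (hok.1 _ hv)]
    exact le_max_left _ _
  have hH0le : ∀ x : Int, pvVal (List.replicate (n + 1).toNat (0 : Int)) x ≤ 0 := by
    intro x
    have := pv_val_mem_or_default [0] (List.replicate (n + 1).toNat (0 : Int)) x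
      (fun y hy => by rw [List.eq_of_mem_replicate hy]; simp) (by simp)
    simp at this
    omega
  have hge0 : pvGe lab (List.replicate (n + 1).toNat (1000000000 : Int))
      (List.replicate (n + 1).toNat (0 : Int)) := by
    intro v hv
    rw [hrep_val v (hok.1 _ hv)]
    exact le_trans (hH0le v) (by norm_num)
  -- A init, core conclusions (H := all-zero array)
  obtain ⟨A1, A2, A3, _, A5, A6, A7, A8, _, A10⟩ :=
    pv_initA n paths summits (List.replicate (n + 1).toNat (0 : Int)) lab hok hn (by simp)
      gates [] _ hgatesL (fun x _ => hH0le x) hrep_len hrep_inS (by simp) (by simp)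
      hrep_vals hrep_relax hge0 qi hqidef
  -- A main loop
  have hfuelA : 2 * pvPhi (pvS paths) qi.2 + qi.1.length <
      2 * (n + 1).toNat * (paths.length + 2) + gates.length + 1 := by
    have hb := pv_phi_le (pvS paths) qi.2
    rw [A1, hSlen] at hb
    have hq0 : qi.1.length = gates.length := by rw [A10]; simp
    rw [hq0, Nat.mul_assoc]
    omega
  obtain ⟨F1, F2, F3, F4⟩ :=
    pv_dij_main n paths summits gA (pvS paths) lab hok hn rfl hglen0 hadjA hadjA'
      (2 * (n + 1).toNat * (paths.length + 2) + gates.length + 1) qi.1 qi.2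
      A1 A2 A3 A5 (fun v hv _ => A6 v hv) hfuelA
  rw [← hFdef] at F1 F2 F3 F4
  have hFg : ∀ x ∈ gates, pvVal F x ≤ 0 := by
    intro x hx
    have := F2 x
    rw [A8 x hx] at this
    exact this
  have hClosedFc : ∀ e ∈ pvEdges paths, PySem.Set.contains (PySem.Set.ofList summits) e.1 = false →
      pvVal F e.2.1 ≤ max (pvVal F e.1) e.2.2 := by
    intro e he hc
    have hns : e.1 ∉ summits := by
      intro hcon
      rw [(pv_contains_summ summits e.1).mpr hcon] at hc
      cases hc
    exact F4 e.1 (hedge e he).1 hns e.2.1 e.2.2 he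
  -- B init, core conclusions
  obtain ⟨B1, B2, B3, B4, _, _⟩ :=
    pv_initB n paths summits (List.replicate (n + 1).toNat (0 : Int)) lab hok hn (by simp)
      gates _ hgatesL (fun x _ => hH0le x) hrep_len hrep_inS hrep_vals hge0 t1 ht1def
  -- B main loop
  have hfuelB : pvPhi (pvS paths) t1 < (n + 1).toNat * (paths.length + 2) + 1 := by
    have hb := pv_phi_le (pvS paths) t1
    rw [B1, hSlen] at hb
    omega
  obtain ⟨Hb1, Hb2, Hb3⟩ :=
    pv_bf_main n (pvS paths) (PySem.Set.ofList summits) lab hok.1 hn (pvEdges paths) hedge h0S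
      ((n + 1).toNat * (paths.length + 2) + 1) t1 B1 B2 hfuelB
  rw [← hHdef] at Hb1 Hb2 Hb3
  have hHg : ∀ x ∈ gates, pvVal H x ≤ 0 := by
    intro x hx
    have := Hb2 x
    rw [B4 x hx] at this
    exact this
  have hClosedHrel : ∀ u v w, (u, v, w) ∈ pvEdges paths → u ∉ summits →
      pvVal H v ≤ max (pvVal H u) w := by
    intro u v w hm hns
    have hc : PySem.Set.contains (PySem.Set.ofList summits) u = false := by
      cases hcb : PySem.Set.contains (PySem.Set.ofList summits) u
      · rfl
      · exact absurd ((pv_contains_summ summits u).mp hcb) hns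
    exact Hb3 (u, v, w) hm hc
  -- A init again, with the real H
  obtain ⟨_, _, _, AH4, _, _, _, _, AH9, _⟩ :=
    pv_initA n paths summits H lab hok hn Hb1
      gates [] _ hgatesL hHg hrep_len hrep_inS (by simp) (by simp)
      hrep_vals hrep_relax
      (fun v hv => le_trans (le_trans (Hb2 v) (B3 v (hok.1 v hv)))
        (le_of_eq (hrep_val v (hok.1 v hv)).symm)) qi hqidef
  have hGeFH : pvGe lab F H := by
    have := pv_dij_ge n paths summits gA H lab hok hn Hb1 hadjA2 hClosedHrel
      (2 * (n + 1).toNat * (paths.length + 2) + gates.length + 1) qi.1 qi.2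
      A1 (fun e he => ⟨AH4 e he, (A3 e he).2.2⟩) AH9
    rw [← hFdef] at this
    exact this
  -- B init again, with the real F
  obtain ⟨_, _, _, _, _, BF6⟩ :=
    pv_initB n paths summits F lab hok hn F1
      gates _ hgatesL hFg hrep_len hrep_inS hrep_vals
      (fun v hv => le_trans (F3 v (hok.1 v hv)) (le_of_eq (hrep_val v (hok.1 v hv)).symm))
      t1 ht1def
  have hGeHF : pvGe lab H F := by
    have := pv_bf_ge n (PySem.Set.ofList summits) lab hok.1 hn (pvEdges paths) F F1
      (fun e he => ⟨(hedge e he).1, (hedge e he).2.1⟩) hClosedFc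
      ((n + 1).toNat * (paths.length + 2) + 1) t1 B1 BF6
    rw [← hHdef] at this
    exact this
  have hEq : ∀ v ∈ lab, PySem.List.pyGetD F v 0 = PySem.List.pyGetD H v 0 :=
    fun v hv => le_antisymm (hGeHF v hv) (hGeFH v hv)
  -- final selection
  rw [PySem.List.foldl_append_singleton_eq_map (fun v => (v, PySem.List.pyGetD F v 0)) summits [],
    List.nil_append]
  have hmapeq : summits.map (fun v => (v, PySem.List.pyGetD F v 0)) =
      summits.map (fun v => (v, PySem.List.pyGetD H v 0)) :=
    List.map_congr_left (fun v hv => by rw [hEq v (hsummL v hv)])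
  rw [hmapeq]
  obtain ⟨s, ss, hcons⟩ := List.exists_cons_of_ne_nil hsumne
  cases hsort : PySem.List.sorted2 (summits.map (fun v => (v, PySem.List.pyGetD H v 0)))
      (fun x => x.2) (fun x => x.1) false with
  | nil =>
    exfalso
    have hp := PySem.List.sorted2_perm (summits.map (fun v => (v, PySem.List.pyGetD H v 0)))
      (fun x => x.2) (fun x => x.1) false
    rw [hsort] at hp
    have := hp.length_eq
    rw [hcons] at this
    simp at this
  | cons m tl =>
    rw [PySem.List.pyGetD_zero_cons]
    obtain ⟨hm_mem, hm_min⟩ := pv_sorted2_head _ m tl hsort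
    obtain ⟨vm, hvm_mem, hvm_eq⟩ := List.mem_map.mp hm_mem
    have hs0 : PySem.List.pyGetD summits 0 0 = s := by
      rw [hcons, PySem.List.pyGetD_zero_cons]
    rw [hs0]
    obtain ⟨b1, b2, b3⟩ := pv_fold_best H summits s _ rfl
    set best := summits.foldl (fun best v =>
      if PySem.List.pyGetD H v 0 < PySem.List.pyGetD H best 0 ∨
         (PySem.List.pyGetD H v 0 = PySem.List.pyGetD H best 0 ∧ v < best) then v else best) s
      with hbestdef
  -- (continued)
    have hbmem : best ∈ summits := by
      rcases b1 with h | h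
      · rw [h, hcons]; simp
      · exact h
    have hA : m.2 < PySem.List.pyGetD H best 0 ∨
        (m.2 = PySem.List.pyGetD H best 0 ∧ m.1 ≤ best) := by
      simpa using hm_min (best, PySem.List.pyGetD H best 0)
        (List.mem_map.mpr ⟨best, hbmem, rfl⟩)
    have hB : PySem.List.pyGetD H best 0 < PySem.List.pyGetD H vm 0 ∨
        (PySem.List.pyGetD H best 0 = PySem.List.pyGetD H vm 0 ∧ best ≤ vm) := b3 vm hvm_mem
    have h1 : m.1 = vm := by rw [← hvm_eq]
    have h2 : m.2 = PySem.List.pyGetD H vm 0 := by rw [← hvm_eq]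
    simp only [List.cons.injEq, and_true]
    exact ⟨by omega, by omega⟩
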